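-- pv_equiv track=rewrite | github.com/beta-tester-team2/study-history | 2025-03-18/13.발전기2/권재은.py | solution
-- ===== SOURCE A (Python) =====
-- def solution(home, k):
-- 	n = len(home)
-- 	visit = [[False] * n for _ in range(n)]
-- 	group_count = {} # 파이썬에서 {}는 딕셔너리로, java에서의 map과 같이 k,v를 갖는 형식
-- 	# java에서도 map 할 때 초기 크기 지정해줄 필요 x, 배열(array)만 크기 지정 필요 o, 리스트(arrayList)는 동적 배열이라 크기 지정 필요 x
--
-- 	for i in range(n):
-- 		for j in range(n):
-- 			if not visit[i][j]:
-- 				home_type = home[i][j]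
-- 				visit[i][j] = True
-- 				group_size = group(home, visit, i, j, n, home_type)
--
-- 				if group_size >= k:
-- 					group_count[home_type] = group_count.get(home_type, 0) + 1
-- 					# group_count.get(home_type, 0) + 1 에서 +1은 value 에만 적용됨
--           # .get(home_type, 0)에서 0은 해당되는 value가 없을 때 value는 0으로 설정하라는 default의 뜻
--
-- 	max_groups = 0
-- 	generator = 0
--
-- 	for home_type, count in group_count.items(): #.items: 딕셔너리의 모든 k,v를 튜플 형태로 home_type, count에 반환
-- 		if (count > max_groups) or (count == max_groups and home_type > generator):
-- 			max_groups = count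
-- 			generator = home_type
--
-- 	return generator
--
-- def group(home, visit, x, y, n, home_type):
-- 	location = [(x, y)]
-- 	group_size = 0
-- 	directions = [(-1, 0), (1, 0), (0, -1), (0, 1)]
--
-- 	while location:
-- 		x, y = location.pop()
-- 		group_size += 1
--
-- 		for dx, dy in directions:
-- 			nx, ny = x + dx, y + dy
-- 			if (0 <= nx < n) and (0 <= ny < n) and not (visit[nx][ny]) and (home[nx][ny] == home_type):
-- 				visit[nx][ny] = True
-- 				location.append((nx, ny))
--
-- 	return group_size
-- ===== SOURCE B (Python) =====
-- def solution(home, k):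
--     # Jacobi min-label propagation: every cell starts labelled with its own flat
--     # index i*n+j; rounds replace each label by the min over itself and its
--     # equal-valued grid neighbours until a fixpoint, so each cell ends up with the
--     # smallest flat index of its connected same-value region.  Then region sizes
--     # are tallied per label, labels of size >= k increment a per-value group
--     # count, and the winning value is the lexicographic max of (count, value).
--     n = len(home)
--     labels = list(range(n * n))
--     changed = True
--     while changed:
--         new = []
--         for i in range(n):
--             for j in range(n):
--                 m = labels[i * n + j]
--                 if i > 0 and home[i - 1][j] == home[i][j]:
--                     m = min(m, labels[(i - 1) * n + j])
--                 if i + 1 < n and home[i + 1][j] == home[i][j]: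
--                     m = min(m, labels[(i + 1) * n + j])
--                 if j > 0 and home[i][j - 1] == home[i][j]:
--                     m = min(m, labels[i * n + j - 1])
--                 if j + 1 < n and home[i][j + 1] == home[i][j]:
--                     m = min(m, labels[i * n + j + 1])
--                 new.append(m)
--         changed = new != labels
--         labels = new
--     size = {}
--     for idx in range(n * n):
--         r = labels[idx]
--         size[r] = size.get(r, 0) + 1
--     counts = {}
--     for r, s in size.items():
--         if s >= k:
--             t = home[r // n][r % n]
--             counts[t] = counts.get(t, 0) + 1
--     best = (0, 0)
--     for t, c in counts.items():
--         if (c, t) > best: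
--             best = (c, t)
--     return best[1]
-- ===== Notes on version B (the rewrite author's own statement) =====
-- stated objective: alternative
-- what changed: Flood fill (explicit-stack DFS with a visited matrix discovering one component at a time) is replaced by Jacobi min-label propagation: every cell starts labelled with its own flat index and rounds take the min over equal-valued neighbours until a fixpoint, so each cell carries the smallest index of its component; sizes are then tallied per label and the winner picked as the lexicographic max of (count, value).
import Mathlib
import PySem

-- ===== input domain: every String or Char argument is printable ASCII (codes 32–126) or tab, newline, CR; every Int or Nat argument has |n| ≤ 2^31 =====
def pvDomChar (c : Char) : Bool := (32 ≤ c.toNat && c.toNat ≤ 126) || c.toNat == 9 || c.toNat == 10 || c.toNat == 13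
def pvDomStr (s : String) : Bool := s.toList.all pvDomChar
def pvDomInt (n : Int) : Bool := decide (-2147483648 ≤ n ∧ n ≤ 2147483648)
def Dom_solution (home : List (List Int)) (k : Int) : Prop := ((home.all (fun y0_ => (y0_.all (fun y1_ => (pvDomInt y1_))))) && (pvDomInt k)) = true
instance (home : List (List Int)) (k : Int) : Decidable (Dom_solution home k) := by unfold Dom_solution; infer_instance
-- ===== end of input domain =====

-- B replaces A's per-component flood fill (explicit-stack DFS over a visited matrix) by
-- Jacobi min-label propagation: every cell starts labelled with its own flat index and
-- rounds take the min over equal-valued neighbours until a fixpoint, so each cell ends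
-- with the smallest index of its connected region; sizes are tallied per label and the
-- winner is the lexicographic max of (count, value).  Equal return value proved on Pre_.

-- ===== PORT A =====
def pvDirs : List (Int × Int) := [(-1, 0), (1, 0), (0, -1), (0, 1)]

def pvInb (n x y : Int) : Bool := decide (0 ≤ x) && decide (x < n) && decide (0 ≤ y) && decide (y < n)

def pvHomeGet (home : List (List Int)) (x y : Int) : Option Int :=
  (PySem.List.pyGet? home x).bind (fun row => PySem.List.pyGet? row y)

def pvVisitGet (v : List (List Bool)) (x y : Int) : Bool :=
  ((PySem.List.pyGet? v x).bind (fun row => PySem.List.pyGet? row y)).getD false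

-- visit[x][y] = True; exact for the in-range non-negative indices A's guards establish
def pvVisitSet (v : List (List Bool)) (x y : Int) : List (List Bool) :=
  v.set x.toNat ((v.getD x.toNat []).set y.toNat true)

def pvStepA (home : List (List Int)) (n t x y : Int)
    (st : List (List Bool) × List (Int × Int)) (d : Int × Int) :
    List (List Bool) × List (Int × Int) :=
  let nx := x + d.1
  let ny := y + d.2
  if pvInb n nx ny && !pvVisitGet st.1 nx ny && (pvHomeGet home nx ny == some t) then
    (pvVisitSet st.1 nx ny, st.2 ++ [(nx, ny)])
  else st

-- the `while location:` loop of `group`; fuel n²+1 is proved sufficient below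
def pvGroupLoop (home : List (List Int)) (n t : Int) :
    Nat → List (List Bool) → List (Int × Int) → Int → List (List Bool) × Int
  | 0, v, _, size => (v, size)
  | fuel + 1, v, loc, size =>
    match loc.getLast? with
    | none => (v, size)
    | some (x, y) =>
      let st := pvDirs.foldl (pvStepA home n t x y) (v, loc.dropLast)
      pvGroupLoop home n t fuel st.1 st.2 (size + 1)

def pvCellA (home : List (List Int)) (n k : Int)
    (s : List (List Bool) × PySem.Dict Int Int) (c : Int × Int) :
    List (List Bool) × PySem.Dict Int Int :=
  if pvVisitGet s.1 c.1 c.2 then s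
  else
    let t := (pvHomeGet home c.1 c.2).getD 0
    let r := pvGroupLoop home n t (n.toNat * n.toNat + 1) (pvVisitSet s.1 c.1 c.2) [c] 0
    if r.2 ≥ k then (r.1, s.2.insert t (s.2.getD t 0 + 1)) else (r.1, s.2)

def pvSelStep (s : Int × Int) (p : Int × Int) : Int × Int :=
  if p.2 > s.1 ∨ (p.2 = s.1 ∧ p.1 > s.2) then (p.2, p.1) else s

def solution (home : List (List Int)) (k : Int) : Int :=
  let n : Int := home.length
  let visit0 := List.replicate n.toNat (List.replicate n.toNat false)
  let st := (PySem.List.pyRange 0 n 1).foldl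
    (fun s i => (PySem.List.pyRange 0 n 1).foldl (fun s' j => pvCellA home n k s' (i, j)) s)
    (visit0, PySem.Dict.empty)
  (st.2.items.foldl pvSelStep (0, 0)).2

-- ===== PORT B =====
-- labels[x] for the in-range non-negative flat indices B's guards establish
def pvLget (labels : List Int) (x : Int) : Int := (PySem.List.pyGet? labels x).getD 0

-- the body of B's inner double loop: min over the cell's own label and the labels of
-- equal-valued in-range neighbours (the four guarded `min` updates of Source B)
def pvNewLabel (home : List (List Int)) (n : Int) (labels : List Int) (i j : Int) : Int :=
  let m0 := pvLget labels (i * n + j)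
  let m1 := if decide (i > 0) && (pvHomeGet home (i - 1) j == pvHomeGet home i j) then
      min m0 (pvLget labels ((i - 1) * n + j)) else m0
  let m2 := if decide (i + 1 < n) && (pvHomeGet home (i + 1) j == pvHomeGet home i j) then
      min m1 (pvLget labels ((i + 1) * n + j)) else m1
  let m3 := if decide (j > 0) && (pvHomeGet home i (j - 1) == pvHomeGet home i j) then
      min m2 (pvLget labels (i * n + j - 1)) else m2
  if decide (j + 1 < n) && (pvHomeGet home i (j + 1) == pvHomeGet home i j) then
    min m3 (pvLget labels (i * n + j + 1)) else m3

-- one round of Source B's `while changed:` loop: build the new label list cell by cell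
def pvRound (home : List (List Int)) (n : Int) (labels : List Int) : List Int :=
  (PySem.List.pyRange 0 n 1).foldl
    (fun acc i => (PySem.List.pyRange 0 n 1).foldl
      (fun acc2 j => acc2 ++ [pvNewLabel home n labels i j]) acc) []

-- Source B's `while changed:` loop; fuel (n²)²+1 is proved sufficient below
def pvIter (home : List (List Int)) (n : Int) : Nat → List Int → List Int
  | 0, labels => labels
  | fuel + 1, labels =>
    let nl := pvRound home n labels
    if nl = labels then nl else pvIter home n fuel nl

def pvTupGt (a b : Int × Int) : Bool :=
  decide (a.1 > b.1) || (decide (a.1 = b.1) && decide (a.2 > b.2))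

-- `if (c, t) > best: best = (c, t)` of Source B (Python tuple comparison)
def pvSelB (best : Int × Int) (p : Int × Int) : Int × Int :=
  if pvTupGt (p.2, p.1) best then (p.2, p.1) else best

def solution_alt (home : List (List Int)) (k : Int) : Int :=
  let n : Int := home.length
  let labels := pvIter home n (n.toNat * n.toNat * (n.toNat * n.toNat) + 1)
    (PySem.List.pyRange 0 (n * n) 1)
  let size := (PySem.List.pyRange 0 (n * n) 1).foldl
    (fun d idx => let r := pvLget labels idx; d.insert r (d.getD r 0 + 1)) PySem.Dict.empty
  let counts := size.items.foldl
    (fun d p => if p.2 ≥ k then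
        let t := (pvHomeGet home (PySem.Int.floordiv p.1 n) (PySem.Int.mod p.1 n)).getD 0
        d.insert t (d.getD t 0 + 1)
      else d) PySem.Dict.empty
  (counts.items.foldl pvSelB (0, 0)).2

-- ===== PRECONDITION & SPEC =====
-- Exactly the inputs on which the Python A returns: whenever some row is shorter than
-- len(home), A eventually evaluates home[x][y] with y ≥ len(home[x]) and raises IndexError.
def Pre_solution (home : List (List Int)) (k : Int) : Prop :=
  ∀ row ∈ home, (home.length : Int) ≤ (row.length : Int)
instance (home : List (List Int)) (k : Int) : Decidable (Pre_solution home k) := by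
  unfold Pre_solution; infer_instance

def pvWitness_solution : List (List Int) × Int := ([[1, 1], [1, 2]], 2)

def Spec_solution (home : List (List Int)) (k : Int) (out : Int) : Prop := out = solution_alt home k
instance (home : List (List Int)) (k : Int) (out : Int) : Decidable (Spec_solution home k out) := by unfold Spec_solution; infer_instance

-- ===== CLAIM (what is proved, stated in full; the proofs are below) =====
def Claim_equal_solution : Prop := ∀ (home : List (List Int)) (k : Int), Dom_solution home k → Pre_solution home k → Spec_solution home k (solution home k)

-- ===== LEMMAS AND PROOFS =====

-- proof-side abstractions
def pvNbrs (c : Int × Int) : List (Int × Int) :=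
  [(c.1 - 1, c.2), (c.1 + 1, c.2), (c.1, c.2 - 1), (c.1, c.2 + 1)]

def pvOk (home : List (List Int)) (n t : Int) (c : Int × Int) : Bool :=
  pvInb n c.1 c.2 && (pvHomeGet home c.1 c.2 == some t)

def pvMemV (n : Int) (v : List (List Bool)) (c : Int × Int) : Bool :=
  pvInb n c.1 c.2 && pvVisitGet v c.1 c.2

def pvValid (n : Int) (v : List (List Bool)) : Prop :=
  v.length = n.toNat ∧ ∀ r ∈ v, r.length = n.toNat

noncomputable def pvGrid (n : Int) : Finset (Int × Int) := Finset.Ico 0 n ×ˢ Finset.Ico 0 n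

noncomputable def pvCardP (n : Int) (P : Int × Int → Bool) : Nat := ((pvGrid n).filter (fun c => P c = true)).card

-- cells reachable from a base set S through ok-cells not in V (what A's flood computes)
inductive pvRch (ok V : Int × Int → Bool) (S : Int × Int → Prop) : Int × Int → Prop
  | base (c : Int × Int) : S c → pvRch ok V S c
  | step (a c : Int × Int) : pvRch ok V S a → c ∈ pvNbrs a → ok c = true → V c = false → pvRch ok V S c

-- cell-level marking step (what one direction iteration of A's flood does)
def pvMarkA (home : List (List Int)) (n t : Int)
    (st : List (List Bool) × List (Int × Int)) (c : Int × Int) :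
    List (List Bool) × List (Int × Int) :=
  if pvInb n c.1 c.2 && !pvVisitGet st.1 c.1 c.2 && (pvHomeGet home c.1 c.2 == some t) then
    (pvVisitSet st.1 c.1 c.2, st.2 ++ [c])
  else st

-- the connectivity relation both programs compute the components of
def pvIdxI (n : Int) (c : Int × Int) : Int := c.1 * n + c.2

def pvAdj (home : List (List Int)) (n : Int) (c d : Int × Int) : Prop :=
  pvInb n c.1 c.2 = true ∧ pvInb n d.1 d.2 = true ∧ d ∈ pvNbrs c ∧
    pvHomeGet home d.1 d.2 = pvHomeGet home c.1 c.2

def pvConn (home : List (List Int)) (n : Int) : (Int × Int) → (Int × Int) → Prop :=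
  Relation.ReflTransGen (pvAdj home n)

noncomputable def pvCompF (home : List (List Int)) (n : Int) (c : Int × Int) : Finset (Int × Int) :=
  @Finset.filter _ (fun d => pvConn home n c d) (fun _ => Classical.propDecidable _) (pvGrid n)

def pvIsRep (home : List (List Int)) (n : Int) (c : Int × Int) : Prop :=
  pvInb n c.1 c.2 = true ∧ ∀ d, pvConn home n c d → pvIdxI n c ≤ pvIdxI n d

def pvCells (n : Int) : List (Int × Int) :=
  (PySem.List.pyRange 0 n 1).flatMap (fun i => (PySem.List.pyRange 0 n 1).map (fun j => (i, j)))

noncomputable def pvRepsL (home : List (List Int)) (n : Int) (l : List (Int × Int)) : List (Int × Int) :=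
  @List.filter _ (fun c => @decide (pvIsRep home n c) (Classical.propDecidable _)) l

def pvTypeOf (home : List (List Int)) (c : Int × Int) : Int := (pvHomeGet home c.1 c.2).getD 0

-- the common reference: walk the reps in row-major order, count big components per value
noncomputable def pvRefFold (home : List (List Int)) (n k : Int) (l : List (Int × Int)) :
    PySem.Dict Int Int :=
  l.foldl (fun d r => if ((pvCompF home n r).card : Int) ≥ k
      then d.insert (pvTypeOf home r) (d.getD (pvTypeOf home r) 0 + 1) else d) PySem.Dict.empty

-- === basic grid facts ===

lemma pvInb_iff {n x y : Int} : pvInb n x y = true ↔ 0 ≤ x ∧ x < n ∧ 0 ≤ y ∧ y < n := by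
  simp [pvInb]; tauto

lemma mem_pvGrid {n : Int} {c : Int × Int} : c ∈ pvGrid n ↔ pvInb n c.1 c.2 = true := by
  cases c; simp [pvGrid, pvInb_iff, Finset.mem_Ico]; tauto

lemma pvGrid_card {n : Int} : (pvGrid n).card = n.toNat * n.toNat := by
  simp [pvGrid, Int.card_Ico]

lemma pvCardP_le {n : Int} {P : Int × Int → Bool} : pvCardP n P ≤ n.toNat * n.toNat := by
  calc pvCardP n P ≤ (pvGrid n).card := Finset.card_filter_le _ _
    _ = n.toNat * n.toNat := pvGrid_card

lemma pvCardP_mono {n : Int} {P Q : Int × Int → Bool}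
    (h : ∀ c, P c = true → Q c = true) : pvCardP n P ≤ pvCardP n Q := by
  apply Finset.card_le_card
  intro c hc
  simp only [Finset.mem_filter] at hc ⊢
  exact ⟨hc.1, h c hc.2⟩

lemma pvCardP_extend {n : Int} {P Q : Int × Int → Bool} {N : List (Int × Int)}
    (hQ : ∀ c, Q c = true ↔ P c = true ∨ c ∈ N)
    (hnd : N.Nodup) (hNP : ∀ c ∈ N, P c = false) (hNg : ∀ c ∈ N, c ∈ pvGrid n) :
    pvCardP n Q = pvCardP n P + N.length := by
  unfold pvCardP
  have hset : (pvGrid n).filter (fun c => Q c = true)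
      = (pvGrid n).filter (fun c => P c = true) ∪ N.toFinset := by
    ext c
    simp only [Finset.mem_filter, Finset.mem_union, List.mem_toFinset, hQ]
    constructor
    · rintro ⟨hg, hP | hN⟩
      · exact Or.inl ⟨hg, hP⟩
      · exact Or.inr hN
    · rintro (⟨hg, hP⟩ | hN)
      · exact ⟨hg, Or.inl hP⟩
      · exact ⟨hNg c hN, Or.inr hN⟩
  have hdisj : Disjoint ((pvGrid n).filter (fun c => P c = true)) N.toFinset := by
    rw [Finset.disjoint_left]
    intro c hc hcN
    simp only [Finset.mem_filter] at hc
    rw [List.mem_toFinset] at hcN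
    rw [hNP c hcN] at hc
    simp at hc
  rw [hset, Finset.card_union_of_disjoint hdisj, List.toFinset_card_of_nodup hnd]

lemma pvCardP_union_finset {n : Int} {P Q : Int × Int → Bool} {F : Finset (Int × Int)}
    (hQ : ∀ c, Q c = true ↔ P c = true ∨ c ∈ F)
    (hFg : F ⊆ pvGrid n) (hFP : ∀ c ∈ F, P c = false) :
    pvCardP n Q = pvCardP n P + F.card := by
  unfold pvCardP
  have hset : (pvGrid n).filter (fun c => Q c = true)
      = (pvGrid n).filter (fun c => P c = true) ∪ F := by
    ext c
    simp only [Finset.mem_filter, Finset.mem_union, hQ]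
    constructor
    · rintro ⟨hg, hP | hF⟩
      · exact Or.inl ⟨hg, hP⟩
      · exact Or.inr hF
    · rintro (⟨hg, hP⟩ | hF)
      · exact ⟨hg, Or.inl hP⟩
      · exact ⟨hFg hF, Or.inr hF⟩
  have hdisj : Disjoint ((pvGrid n).filter (fun c => P c = true)) F := by
    rw [Finset.disjoint_left]
    intro c hc hcF
    simp only [Finset.mem_filter] at hc
    rw [hFP c hcF] at hc
    simp at hc
  rw [hset, Finset.card_union_of_disjoint hdisj]

lemma pvRch_exists_base {ok V : Int × Int → Bool} {S : Int × Int → Prop} {c : Int × Int}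
    (h : pvRch ok V S c) : ∃ d, S d := by
  induction h with
  | base c hc => exact ⟨c, hc⟩
  | step a c _ _ _ _ ih => exact ih

lemma pvRch_congr {ok ok' V V' : Int × Int → Bool} {S S' : Int × Int → Prop} {c : Int × Int}
    (hok : ∀ c, ok c = ok' c) (hV : ∀ c, V c = V' c) (hS : ∀ c, S c ↔ S' c)
    (h : pvRch ok V S c) : pvRch ok' V' S' c := by
  induction h with
  | base c hc => exact .base c ((hS c).1 hc)
  | step a c _ hnb hok2 hV2 ih => exact .step a c ih hnb (hok c ▸ hok2) (hV c ▸ hV2)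

lemma pvRch_pop {ok V V' : Int × Int → Bool} {S S' : Int × Int → Prop} {w : Int × Int}
    {N : List (Int × Int)}
    (hN : ∀ c, c ∈ N ↔ c ∈ pvNbrs w ∧ ok c = true ∧ V c = false)
    (hV' : ∀ c, V' c = true ↔ V c = true ∨ c ∈ N)
    (hS' : ∀ c, S' c ↔ S c ∨ c ∈ N)
    (hw : V w = true) (c : Int × Int) :
    (V c = true ∨ pvRch ok V (fun d => S d ∨ d = w) c) ↔ (V' c = true ∨ pvRch ok V' S' c) := by
  have hNL : ∀ c ∈ N, pvRch ok V (fun d => S d ∨ d = w) c := by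
    intro c hc
    obtain ⟨hnb, hok, hVc⟩ := (hN c).1 hc
    exact .step w c (.base w (Or.inr rfl)) hnb hok hVc
  have fwd : ∀ c, pvRch ok V (fun d => S d ∨ d = w) c →
      pvRch ok V' S' c ∨ (V c = true ∧ (S c ∨ c = w)) := by
    intro c h
    induction h with
    | base c hc =>
      rcases hc with hS | rfl
      · exact Or.inl (.base c ((hS' c).2 (Or.inl hS)))
      · exact Or.inr ⟨hw, Or.inr rfl⟩
    | step a c ha hnb hok hVc ih =>
      by_cases hcN : c ∈ N
      · exact Or.inl (.base c ((hS' c).2 (Or.inr hcN)))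
      · have hV'c : V' c = false := by
          cases hvc : V' c
          · rfl
          · rcases (hV' c).1 hvc with h1 | h1
            · rw [hVc] at h1; simp at h1
            · exact absurd h1 hcN
        rcases ih with ih | ⟨hVa, hSa⟩
        · exact Or.inl (.step a c ih hnb hok hV'c)
        · rcases hSa with hSa | rfl
          · exact Or.inl (.step a c (.base a ((hS' a).2 (Or.inl hSa))) hnb hok hV'c)
          · exact absurd ((hN c).2 ⟨hnb, hok, hVc⟩) hcN
  have bwd : ∀ c, pvRch ok V' S' c → pvRch ok V (fun d => S d ∨ d = w) c := by
    intro c h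
    induction h with
    | base c hc =>
      rcases (hS' c).1 hc with hS | hcN
      · exact .base c (Or.inl hS)
      · exact hNL c hcN
    | step a c ha hnb hok hVc ih =>
      have hVcf : V c = false := by
        cases hvc : V c
        · rfl
        · rw [(hV' c).2 (Or.inl hvc)] at hVc; simp at hVc
      exact .step a c ih hnb hok hVcf
  constructor
  · rintro (hVc | h)
    · exact Or.inl ((hV' c).2 (Or.inl hVc))
    · rcases fwd c h with h' | ⟨hVc, _⟩
      · exact Or.inr h'
      · exact Or.inl ((hV' c).2 (Or.inl hVc))
  · rintro (hV'c | h)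
    · rcases (hV' c).1 hV'c with hVc | hcN
      · exact Or.inl hVc
      · exact Or.inr (hNL c hcN)
    · exact Or.inr (bwd c h)

-- ---- visited-matrix lemmas (port A side) ----
lemma pvMemV_of_get {n : Int} {v : List (List Bool)} {x y : Int}
    (hinb : pvInb n x y = true) : pvMemV n v (x, y) = pvVisitGet v x y := by
  simp [pvMemV, hinb]

lemma pvVisitGet_natCast {v : List (List Bool)} {a b : Int} (ha : 0 ≤ a) (hb : 0 ≤ b) :
    pvVisitGet v a b = (((v[a.toNat]?).getD [])[b.toNat]?).getD false := by
  have h1 : PySem.List.pyGet? v a = v[a.toNat]? := by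
    rw [← PySem.List.pyGet?_natCast]
    congr 1
    omega
  unfold pvVisitGet
  rw [h1]
  cases h : v[a.toNat]? with
  | none => simp
  | some r =>
    have h2 : PySem.List.pyGet? r b = r[b.toNat]? := by
      rw [← PySem.List.pyGet?_natCast]
      congr 1
      omega
    simp [h2]

lemma pvValid_set {n : Int} {v : List (List Bool)} {x y : Int}
    (hv : pvValid n v) (hinb : pvInb n x y = true) : pvValid n (pvVisitSet v x y) := by
  obtain ⟨h1, h2⟩ := hv
  obtain ⟨hx0, hxn, hy0, hyn⟩ := pvInb_iff.1 hinb
  have hxlt : x.toNat < v.length := by omega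
  refine ⟨by simp [pvVisitSet, h1], ?_⟩
  intro r hr
  rcases List.mem_or_eq_of_mem_set hr with hr | rfl
  · exact h2 r hr
  · have hrow : v.getD x.toNat [] = v[x.toNat] := by
      rw [List.getD_eq_getElem?_getD, List.getElem?_eq_getElem hxlt]
      rfl
    rw [List.length_set, hrow]
    exact h2 _ (List.getElem_mem hxlt)

lemma pvMemV_set {n : Int} {v : List (List Bool)} {x y : Int}
    (hv : pvValid n v) (hinb : pvInb n x y = true) (c : Int × Int) :
    pvMemV n (pvVisitSet v x y) c = true ↔ pvMemV n v c = true ∨ c = (x, y) := by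
  obtain ⟨a, b⟩ := c
  obtain ⟨hx0, hxn, hy0, hyn⟩ := pvInb_iff.1 hinb
  by_cases hab : pvInb n a b = true
  · obtain ⟨ha0, han, hb0, hbn⟩ := pvInb_iff.1 hab
    have hxlt : x.toNat < v.length := by have := hv.1; omega
    have hrow : v.getD x.toNat [] = v[x.toNat] := by
      rw [List.getD_eq_getElem?_getD, List.getElem?_eq_getElem hxlt]
      rfl
    have hrlen : (v[x.toNat]).length = n.toNat := hv.2 _ (List.getElem_mem hxlt)
    rw [pvMemV_of_get hab, pvMemV_of_get hab, pvVisitGet_natCast ha0 hb0,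
      pvVisitGet_natCast ha0 hb0]
    unfold pvVisitSet
    by_cases hax : x = a
    · subst hax
      have e1 : (v.set x.toNat ((v.getD x.toNat []).set y.toNat true))[x.toNat]?
          = some ((v.getD x.toNat []).set y.toNat true) := by
        rw [List.getElem?_set]
        simp [hxlt]
      rw [e1, List.getElem?_eq_getElem hxlt]
      simp only [Option.getD_some, hrow, List.getElem?_set, hrlen]
      by_cases hby : y = b
      · subst hby
        have hylt : y.toNat < n.toNat := by omega
        simp [hylt]
      · have hyb : ¬ y.toNat = b.toNat := by omega
        have hbne : ¬ b = y := by omega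
        rw [if_neg hyb]
        simp [Prod.ext_iff, hbne]
    · have h1 : ¬ x.toNat = a.toNat := by omega
      have hane : ¬ a = x := fun h => hax h.symm
      rw [List.getElem?_set, if_neg h1]
      simp [Prod.ext_iff, hane]
  · have hne : ¬ ((a, b) = (x, y)) := by
      intro h
      have h1 : a = x := congrArg Prod.fst h
      have h2 : b = y := congrArg Prod.snd h
      subst h1
      subst h2
      exact hab hinb
    have hf1 : pvMemV n (pvVisitSet v x y) (a, b) = false := by
      unfold pvMemV
      rw [eq_false_of_ne_true hab]
      simp
    have hf2 : pvMemV n v (a, b) = false := by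
      unfold pvMemV
      rw [eq_false_of_ne_true hab]
      simp
    rw [hf1, hf2]
    simp [hne]

-- ---- direction folds add exactly the fresh matching neighbours ----
lemma pvCondA {home : List (List Int)} {n t : Int} {v : List (List Bool)} (c : Int × Int) :
    (pvInb n c.1 c.2 && !pvVisitGet v c.1 c.2 && (pvHomeGet home c.1 c.2 == some t))
      = (pvOk home n t c && !pvMemV n v c) := by
  cases h1 : pvInb n c.1 c.2 <;> cases h2 : pvVisitGet v c.1 c.2 <;>
    cases h3 : (pvHomeGet home c.1 c.2 == some t) <;> simp [pvOk, pvMemV, h1, h2, h3]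

lemma pvOk_inb {home : List (List Int)} {n t : Int} {c : Int × Int}
    (h : pvOk home n t c = true) : pvInb n c.1 c.2 = true :=
  ((Bool.and_eq_true _ _).mp h).1

lemma pvFoldMarkA {home : List (List Int)} {n t : Int} :
    ∀ (cs : List (Int × Int)) (v : List (List Bool)) (L : List (Int × Int)),
      pvValid n v → cs.Nodup →
      pvValid n (cs.foldl (pvMarkA home n t) (v, L)).1 ∧
      (cs.foldl (pvMarkA home n t) (v, L)).2
        = L ++ cs.filter (fun c => pvOk home n t c && !pvMemV n v c) ∧
      (∀ c, pvMemV n (cs.foldl (pvMarkA home n t) (v, L)).1 c = true ↔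
        pvMemV n v c = true ∨ c ∈ cs.filter (fun c => pvOk home n t c && !pvMemV n v c)) := by
  intro cs
  induction cs with
  | nil =>
    intro v L hv _
    exact ⟨hv, by simp, by simp⟩
  | cons c cs ih =>
    intro v L hv hnd
    rw [List.nodup_cons] at hnd
    obtain ⟨hcnot, hnd⟩ := hnd
    simp only [List.foldl_cons]
    have hstep : pvMarkA home n t (v, L) c
        = if pvOk home n t c && !pvMemV n v c then (pvVisitSet v c.1 c.2, L ++ [c]) else (v, L) := by
      unfold pvMarkA
      rw [pvCondA]
    by_cases hcond : (pvOk home n t c && !pvMemV n v c) = true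
    · rw [hstep, if_pos hcond]
      have hok : pvOk home n t c = true := ((Bool.and_eq_true _ _).mp hcond).1
      have hinb : pvInb n c.1 c.2 = true := pvOk_inb hok
      have hv' := pvValid_set hv hinb
      obtain ⟨ihv, ih2, ih3⟩ := ih (pvVisitSet v c.1 c.2) (L ++ [c]) hv' hnd
      have hmemeq : ∀ d ∈ cs, pvMemV n (pvVisitSet v c.1 c.2) d = pvMemV n v d := by
        intro d hd
        have hne : ¬ d = (c.1, c.2) := by
          intro h
          exact hcnot (by rw [h] at hd; simpa using hd)
        apply Bool.coe_iff_coe.mp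
        rw [pvMemV_set hv hinb d]
        simp [hne]
      have hfc : cs.filter (fun d => pvOk home n t d && !pvMemV n (pvVisitSet v c.1 c.2) d)
          = cs.filter (fun d => pvOk home n t d && !pvMemV n v d) := by
        apply List.filter_congr
        intro d hd
        rw [hmemeq d hd]
      rw [hfc] at ih2 ih3
      have hfcons : (c :: cs).filter (fun d => pvOk home n t d && !pvMemV n v d)
          = c :: cs.filter (fun d => pvOk home n t d && !pvMemV n v d) :=
        List.filter_cons_of_pos hcond
      refine ⟨ihv, ?_, ?_⟩
      · rw [ih2, hfcons]
        simp
      · intro d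
        rw [ih3 d, pvMemV_set hv hinb d, hfcons]
        simp only [List.mem_cons]
        constructor
        · rintro ((h | h) | h)
          · exact Or.inl h
          · exact Or.inr (Or.inl (by simpa using h))
          · exact Or.inr (Or.inr h)
        · rintro (h | (h | h))
          · exact Or.inl (Or.inl h)
          · exact Or.inl (Or.inr (by simpa using h))
          · exact Or.inr h
    · rw [hstep, if_neg hcond]
      obtain ⟨ihv, ih2, ih3⟩ := ih v L hv hnd
      have hfcons : (c :: cs).filter (fun d => pvOk home n t d && !pvMemV n v d)
          = cs.filter (fun d => pvOk home n t d && !pvMemV n v d) :=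
        List.filter_cons_of_neg (by simpa using hcond)
      exact ⟨ihv, by rw [ih2, hfcons], by intro d; rw [ih3 d, hfcons]⟩

lemma pvNbrs_nodup (w : Int × Int) : (pvNbrs w).Nodup := by
  cases w with
  | mk a b => simp [pvNbrs, Prod.ext_iff]; omega

lemma pvStepA_eq_markA {home : List (List Int)} {n t x y : Int}
    (st : List (List Bool) × List (Int × Int)) :
    pvDirs.foldl (pvStepA home n t x y) st = (pvNbrs (x, y)).foldl (pvMarkA home n t) st := by
  simp only [pvDirs, pvNbrs, List.foldl]
  norm_num [pvStepA, pvMarkA, sub_eq_add_neg]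

-- ---- flood-fill characterisation, port A ----
lemma pvGroupLoop_spec {home : List (List Int)} {n t : Int} :
    ∀ (fuel : Nat) (v : List (List Bool)) (loc : List (Int × Int)) (size : Int),
      pvValid n v →
      (∀ c ∈ loc, pvMemV n v c = true) →
      (n.toNat * n.toNat - pvCardP n (pvMemV n v)) + loc.length ≤ fuel →
      pvValid n (pvGroupLoop home n t fuel v loc size).1 ∧
      (∀ c, pvMemV n (pvGroupLoop home n t fuel v loc size).1 c = true ↔
        pvMemV n v c = true ∨ pvRch (pvOk home n t) (pvMemV n v) (fun d => d ∈ loc) c) ∧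
      (pvGroupLoop home n t fuel v loc size).2
        = size + loc.length + ((pvCardP n (pvMemV n (pvGroupLoop home n t fuel v loc size).1) : Int)
            - (pvCardP n (pvMemV n v) : Int)) := by
  intro fuel
  induction fuel with
  | zero =>
    intro v loc size hv hloc hfuel
    have hloc0 : loc = [] := by
      cases loc with
      | nil => rfl
      | cons a l => simp at hfuel
    subst hloc0
    refine ⟨hv, ?_, by simp [pvGroupLoop]⟩
    intro c
    simp only [pvGroupLoop]
    constructor
    · exact Or.inl
    · rintro (h | h)
      · exact h
      · obtain ⟨d, hd⟩ := pvRch_exists_base h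
        simp at hd
  | succ fuel ih =>
    intro v loc size hv hloc hfuel
    cases hlast : loc.getLast? with
    | none =>
      have hloc0 : loc = [] := List.getLast?_eq_none_iff.mp hlast
      subst hloc0
      refine ⟨hv, ?_, by simp [pvGroupLoop]⟩
      intro c
      simp only [pvGroupLoop]
      constructor
      · exact Or.inl
      · rintro (h | h)
        · exact h
        · obtain ⟨d, hd⟩ := pvRch_exists_base h
          simp at hd
    | some w =>
      obtain ⟨x, y⟩ := w
      have hne : loc ≠ [] := by
        intro h
        rw [h] at hlast
        simp at hlast
      have hgl : loc.getLast hne = (x, y) := by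
        have := List.getLast?_eq_some_getLast (l := loc) hne
        rw [hlast] at this
        exact (Option.some_inj.mp this).symm
      have hsplit : loc.dropLast ++ [(x, y)] = loc := by
        rw [← hgl]
        exact List.dropLast_append_getLast hne
      have hred : pvGroupLoop home n t (fuel + 1) v loc size
          = pvGroupLoop home n t fuel
              ((pvNbrs (x, y)).foldl (pvMarkA home n t) (v, loc.dropLast)).1
              ((pvNbrs (x, y)).foldl (pvMarkA home n t) (v, loc.dropLast)).2 (size + 1) := by
        conv_lhs => rw [pvGroupLoop, hlast]
        dsimp only
        rw [pvStepA_eq_markA]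
      obtain ⟨hv1, h2, h3⟩ := pvFoldMarkA (pvNbrs (x, y)) v loc.dropLast hv (pvNbrs_nodup _)
      set st := (pvNbrs (x, y)).foldl (pvMarkA home n t) (v, loc.dropLast) with hst
      set N := (pvNbrs (x, y)).filter (fun c => pvOk home n t c && !pvMemV n v c) with hNdef
      have hNok : ∀ c ∈ N, pvOk home n t c = true ∧ pvMemV n v c = false := by
        intro c hc
        rw [hNdef, List.mem_filter] at hc
        have := hc.2
        simp only [Bool.and_eq_true, Bool.not_eq_true'] at this
        exact this
      have hNgrid : ∀ c ∈ N, c ∈ pvGrid n := fun c hc => mem_pvGrid.mpr (pvOk_inb (hNok c hc).1)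
      have hNnd : N.Nodup := List.Nodup.filter _ (pvNbrs_nodup _)
      have hcard1 : pvCardP n (pvMemV n st.1) = pvCardP n (pvMemV n v) + N.length :=
        pvCardP_extend h3 hNnd (fun c hc => (hNok c hc).2) hNgrid
      have hcardle : pvCardP n (pvMemV n st.1) ≤ n.toNat * n.toNat := pvCardP_le
      have hlen2 : st.2.length = loc.dropLast.length + N.length := by
        rw [h2]
        simp
      have hlocpos : 0 < loc.length := List.length_pos_iff.mpr hne
      have hdllen : loc.dropLast.length = loc.length - 1 := List.length_dropLast
      have hm : (n.toNat * n.toNat - pvCardP n (pvMemV n st.1)) + st.2.length ≤ fuel := by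
        omega
      have hloc1 : ∀ c ∈ st.2, pvMemV n st.1 c = true := by
        intro c hc
        rw [h2, List.mem_append] at hc
        rcases hc with hc | hc
        · exact (h3 c).2 (Or.inl (hloc c (List.dropLast_subset loc hc)))
        · exact (h3 c).2 (Or.inr hc)
      obtain ⟨rv, rmem, rsize⟩ := ih st.1 st.2 (size + 1) hv1 hloc1 hm
      rw [hred]
      have hw : pvMemV n v (x, y) = true := hloc (x, y) (by rw [← hsplit]; simp)
      have hbase : ∀ d, d ∈ loc ↔ d ∈ loc.dropLast ∨ d = (x, y) := by
        intro d
        rw [← hsplit]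
        simp
      refine ⟨rv, ?_, ?_⟩
      · intro c
        rw [rmem c]
        have hpop := pvRch_pop (ok := pvOk home n t) (V := pvMemV n v) (V' := pvMemV n st.1)
          (S := fun d => d ∈ loc.dropLast) (S' := fun d => d ∈ st.2) (w := (x, y)) (N := N)
          (hN := by
            intro d
            rw [hNdef, List.mem_filter]
            simp only [Bool.and_eq_true, Bool.not_eq_true']
            try tauto)
          (hV' := h3)
          (hS' := by
            intro d
            rw [h2]
            exact List.mem_append)
          hw c
        rw [← hpop]
        constructor
        · rintro (h | h)
          · exact Or.inl h
          · exact Or.inr (pvRch_congr (fun _ => rfl) (fun _ => rfl)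
              (fun d => by rw [hbase d]) h)
        · rintro (h | h)
          · exact Or.inl h
          · exact Or.inr (pvRch_congr (fun _ => rfl) (fun _ => rfl)
              (fun d => by rw [hbase d]) h)
      · rw [rsize, hcard1]
        have hmono : pvCardP n (pvMemV n st.1) ≤ pvCardP n (pvMemV n (pvGroupLoop home n t fuel st.1 st.2 (size + 1)).1) := by
          apply pvCardP_mono
          intro c hc
          rw [rmem c]
          exact Or.inl hc
        omega

-- === connectivity basics ===

lemma mem_pvNbrs_symm {c d : Int × Int} (h : d ∈ pvNbrs c) : c ∈ pvNbrs d := by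
  obtain ⟨a, b⟩ := c
  obtain ⟨x, y⟩ := d
  simp only [pvNbrs, List.mem_cons, Prod.mk.injEq,
    List.not_mem_nil, or_false] at h ⊢
  omega

lemma pvAdj_symm {home : List (List Int)} {n : Int} {c d : Int × Int}
    (h : pvAdj home n c d) : pvAdj home n d c := by
  obtain ⟨h1, h2, h3, h4⟩ := h
  exact ⟨h2, h1, mem_pvNbrs_symm h3, h4.symm⟩

lemma pvConn_symm {home : List (List Int)} {n : Int} {c d : Int × Int}
    (h : pvConn home n c d) : pvConn home n d c :=
  Relation.ReflTransGen.symmetric (fun _ _ hh => pvAdj_symm hh) h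

lemma pvConn_trans {home : List (List Int)} {n : Int} {a b c : Int × Int}
    (h1 : pvConn home n a b) (h2 : pvConn home n b c) : pvConn home n a c :=
  Relation.ReflTransGen.trans h1 h2

lemma pvConn_inb {home : List (List Int)} {n : Int} {c d : Int × Int}
    (h : pvConn home n c d) (hc : pvInb n c.1 c.2 = true) : pvInb n d.1 d.2 = true := by
  induction h with
  | refl => exact hc
  | tail _ hadj _ => exact hadj.2.1

lemma pvConn_type {home : List (List Int)} {n : Int} {c d : Int × Int}
    (h : pvConn home n c d) : pvHomeGet home d.1 d.2 = pvHomeGet home c.1 c.2 := by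
  induction h with
  | refl => rfl
  | tail _ hadj ih => rw [hadj.2.2.2, ih]

-- === row-major cell list facts ===

lemma mem_pvCells {n : Int} {c : Int × Int} : c ∈ pvCells n ↔ pvInb n c.1 c.2 = true := by
  obtain ⟨a, b⟩ := c
  simp only [pvCells, List.mem_flatMap, List.mem_map, PySem.List.mem_pyRange_one, pvInb_iff,
    Prod.mk.injEq]
  constructor
  · rintro ⟨i, hi, j, hj, rfl, rfl⟩
    omega
  · rintro ⟨h1, h2, h3, h4⟩
    exact ⟨a, ⟨h1, h2⟩, b, ⟨h3, h4⟩, rfl, rfl⟩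

lemma pvIdx_lt {n : Int} {c d : Int × Int} (hc : pvInb n c.1 c.2 = true)
    (hd : pvInb n d.1 d.2 = true)
    (h : c.1 < d.1 ∨ (c.1 = d.1 ∧ c.2 < d.2)) : pvIdxI n c < pvIdxI n d := by
  obtain ⟨hc0, hcn, hc2, hc2n⟩ := pvInb_iff.1 hc
  obtain ⟨hd0, hdn, hd2, hd2n⟩ := pvInb_iff.1 hd
  unfold pvIdxI
  rcases h with h | ⟨h1, h2⟩
  · nlinarith
  · rw [h1]
    omega

lemma pvIdx_inj {n : Int} {c d : Int × Int} (hc : pvInb n c.1 c.2 = true)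
    (hd : pvInb n d.1 d.2 = true) (h : pvIdxI n c = pvIdxI n d) : c = d := by
  rcases lt_trichotomy c.1 d.1 with h1 | h1 | h1
  · have := pvIdx_lt hc hd (Or.inl h1)
    omega
  · rcases lt_trichotomy c.2 d.2 with h2 | h2 | h2
    · have := pvIdx_lt hc hd (Or.inr ⟨h1, h2⟩)
      omega
    · obtain ⟨a, b⟩ := c
      obtain ⟨x, y⟩ := d
      simp_all
    · have := pvIdx_lt hd hc (Or.inr ⟨h1.symm, h2⟩)
      omega
  · have := pvIdx_lt hd hc (Or.inl h1)
    omega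

lemma pvCells_pairwise {n : Int} :
    (pvCells n).Pairwise (fun a b => pvIdxI n a < pvIdxI n b) := by
  unfold pvCells
  rw [List.pairwise_flatMap]
  refine ⟨?_, ?_⟩
  · intro i _
    rw [List.pairwise_map]
    refine (PySem.List.pairwise_lt_pyRange_one 0 n).imp ?_
    intro a b hab
    unfold pvIdxI
    dsimp only
    omega
  · refine (PySem.List.pairwise_lt_pyRange_one 0 n).imp ?_
    intro i i' hii x hx y hy
    simp only [List.mem_map] at hx hy
    obtain ⟨j, hj, rfl⟩ := hx
    obtain ⟨j', hj', rfl⟩ := hy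
    rw [PySem.List.mem_pyRange_one] at hj hj'
    unfold pvIdxI
    dsimp only
    nlinarith

lemma pvCells_nodup {n : Int} : (pvCells n).Nodup :=
  (pvCells_pairwise (n := n)).imp (fun hab he => absurd (he ▸ hab) (lt_irrefl _))

lemma pvCells_length {n : Int} (hn : 0 ≤ n) : (pvCells n).length = n.toNat * n.toNat := by
  unfold pvCells
  rw [List.length_flatMap]
  have h1 : ∀ l : List Int, (l.map (fun i =>
      ((PySem.List.pyRange 0 n).map (fun j => (i, j))).length)).sum = l.length * n.toNat := by
    intro l
    induction l with
    | nil => simp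
    | cons x xs ih =>
      simp only [List.map_cons, List.sum_cons, List.length_cons]
      rw [ih]
      simp only [List.length_map, PySem.List.length_pyRange_one, Nat.succ_mul]
      omega
  rw [h1, PySem.List.length_pyRange_one]
  simp

lemma pvFlatGet {n : Int} : ∀ (k : Nat) (a : Int) (m : Nat),
    a + (k : Int) = n → m < k * n.toNat →
    ((PySem.List.pyRange a n).flatMap
      (fun i => (PySem.List.pyRange 0 n).map (fun j => (i, j))))[m]?
      = some (a + ((m / n.toNat : Nat) : Int), ((m % n.toNat : Nat) : Int)) := by
  intro k
  induction k with
  | zero =>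
    intro a m _ hm
    simp at hm
  | succ k ih =>
    intro a m ha hm
    have hmul : (k + 1) * n.toNat = k * n.toNat + n.toNat := Nat.succ_mul k n.toNat
    have hnpos : 0 < n.toNat := by
      rcases Nat.eq_zero_or_pos n.toNat with h | h
      · rw [h, Nat.mul_zero] at hm
        omega
      · exact h
    have han : a < n := by push_cast at ha; omega
    rw [PySem.List.pyRange_one_cons han, List.flatMap_cons]
    have hlen : ((PySem.List.pyRange 0 n).map (fun j => (a, j))).length = n.toNat := by
      simp [PySem.List.length_pyRange_one]
    by_cases hm2 : m < n.toNat
    · rw [List.getElem?_append_left (by omega)]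
      rw [List.getElem?_map, PySem.List.getElem?_pyRange_one]
      rw [if_pos (by omega)]
      rw [Nat.div_eq_of_lt hm2, Nat.mod_eq_of_lt hm2]
      simp
    · rw [List.getElem?_append_right (by omega), hlen]
      have hrec := ih (a + 1) (m - n.toNat) (by push_cast at ha ⊢; omega) (by omega)
      rw [hrec]
      have hsub : m - n.toNat + n.toNat = m := by omega
      have hdiv : (m - n.toNat) / n.toNat + 1 = m / n.toNat := by
        conv_rhs => rw [← hsub]
        rw [Nat.add_div_right _ hnpos]
      have hmod : (m - n.toNat) % n.toNat = m % n.toNat := by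
        conv_rhs => rw [← hsub]
        rw [Nat.add_mod_right]
      have hfst : a + 1 + (((m - n.toNat) / n.toNat : Nat) : Int)
          = a + ((m / n.toNat : Nat) : Int) := by omega
      rw [hmod, hfst]

lemma pvIdxI_toNat_lt {n : Int} {c : Int × Int} (hc : pvInb n c.1 c.2 = true) :
    0 ≤ pvIdxI n c ∧ (pvIdxI n c).toNat < n.toNat * n.toNat := by
  obtain ⟨h0, h1, h2, h3⟩ := pvInb_iff.1 hc
  have hn : 0 ≤ n := le_trans h2 (le_of_lt h3)
  have hge : 0 ≤ pvIdxI n c := by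
    unfold pvIdxI
    have := mul_nonneg h0 hn
    omega
  have hlt : pvIdxI n c < n * n := by
    unfold pvIdxI
    nlinarith
  have h4 : ((n.toNat * n.toNat : Nat) : Int) = n * n := by
    push_cast [Int.toNat_of_nonneg hn]
    ring
  omega

lemma pvCells_pos {n : Int} (m : Nat) (hm : m < n.toNat * n.toNat) :
    ∃ c, (pvCells n)[m]? = some c ∧ pvInb n c.1 c.2 = true ∧ pvIdxI n c = (m : Int) := by
  have hnpos : 0 < n.toNat := by
    rcases Nat.eq_zero_or_pos n.toNat with h | h
    · rw [h, Nat.mul_zero] at hm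
      omega
    · exact h
  have h := pvFlatGet (n := n) n.toNat 0 m (by omega) (by omega)
  have h1 : m / n.toNat < n.toNat := (Nat.div_lt_iff_lt_mul hnpos).2 (by omega)
  have h2 : m % n.toNat < n.toNat := Nat.mod_lt _ hnpos
  have h5 : m / n.toNat * n.toNat + m % n.toNat = m := Nat.div_add_mod' m n.toNat
  obtain ⟨q, hq⟩ : ∃ q, m / n.toNat = q := ⟨_, rfl⟩
  obtain ⟨r, hr⟩ : ∃ r, m % n.toNat = r := ⟨_, rfl⟩
  rw [hq] at h h1 h5
  rw [hr] at h h2 h5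
  refine ⟨((q : Int), (r : Int)), ?_, ?_, ?_⟩
  · simpa [pvCells] using h
  · rw [pvInb_iff]
    dsimp only
    omega
  · unfold pvIdxI
    dsimp only
    have h6 : (q : Int) * ((n.toNat : Nat) : Int) + (r : Int) = (m : Int) := by
      exact_mod_cast h5
    have h7 : ((n.toNat : Nat) : Int) = n := by omega
    rw [h7] at h6
    exact h6

lemma pvCells_idx {n : Int} {c : Int × Int} (hc : pvInb n c.1 c.2 = true) :
    (pvCells n)[(pvIdxI n c).toNat]? = some c := by
  have h := pvIdxI_toNat_lt hc
  obtain ⟨c', hget, hinb', hidx⟩ := pvCells_pos (n := n) (pvIdxI n c).toNat h.2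
  have hcc : c' = c := pvIdx_inj hinb' hc (by omega)
  rw [hcc] at hget
  exact hget

lemma pvCells_prefix {n : Int} {pre suf : List (Int × Int)} {c : Int × Int}
    (h : pvCells n = pre ++ c :: suf) {d : Int × Int} (hd : pvInb n d.1 d.2 = true) :
    d ∈ pre ↔ pvIdxI n d < pvIdxI n c := by
  have hpw := pvCells_pairwise (n := n)
  rw [h, List.pairwise_append] at hpw
  obtain ⟨hpre, hcs, hcross⟩ := hpw
  constructor
  · intro hdpre
    exact hcross d hdpre c List.mem_cons_self
  · intro hlt
    have hdm : d ∈ pvCells n := mem_pvCells.2 hd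
    rw [h, List.mem_append, List.mem_cons] at hdm
    rcases hdm with h1 | h1 | h1
    · exact h1
    · subst h1
      omega
    · have := (List.pairwise_cons.1 hcs).1 d h1
      omega

-- === Pre_ gives total home lookups on the grid ===

lemma pvHomeGet_some {home : List (List Int)} {x y : Int}
    (hPre : Pre_solution home 0) (hinb : pvInb (home.length : Int) x y = true) :
    ∃ t, pvHomeGet home x y = some t := by
  obtain ⟨hx0, hxn, hy0, hyn⟩ := pvInb_iff.1 hinb
  unfold pvHomeGet
  rw [PySem.List.pyGet?_of_nonneg _ hx0]
  have hxl : x.toNat < home.length := by omega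
  rw [List.getElem?_eq_getElem hxl]
  have hrow := hPre home[x.toNat] (List.getElem_mem hxl)
  simp only [Option.bind_some]
  rw [PySem.List.pyGet?_of_nonneg _ hy0]
  have hyl : y.toNat < home[x.toNat].length := by omega
  rw [List.getElem?_eq_getElem hyl]
  exact ⟨_, rfl⟩

lemma mem_pvCompF {home : List (List Int)} {n : Int} {c d : Int × Int} :
    d ∈ pvCompF home n c ↔ d ∈ pvGrid n ∧ pvConn home n c d := by
  unfold pvCompF
  exact @Finset.mem_filter _ _ (fun _ => Classical.propDecidable _) _ _

-- === A's flood computes exactly the component ===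

lemma pvReach_iff_conn {home : List (List Int)} {v : List (List Bool)} {c : Int × Int} {t : Int}
    (hPre : Pre_solution home 0)
    (hc : pvInb (home.length : Int) c.1 c.2 = true)
    (ht : pvHomeGet home c.1 c.2 = some t)
    (hv : pvValid (home.length : Int) v)
    (hdisj : ∀ d, pvConn home (home.length : Int) c d → pvMemV (home.length : Int) v d = false) :
    ∀ e, pvRch (pvOk home (home.length : Int) t)
        (pvMemV (home.length : Int) (pvVisitSet v c.1 c.2)) (fun d => d ∈ [c]) e
      ↔ pvConn home (home.length : Int) c e := by
  intro e
  constructor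
  · intro h
    induction h with
    | base e he =>
      rw [List.mem_singleton] at he
      subst he
      exact Relation.ReflTransGen.refl
    | step a e ha hnb hok hV ih =>
      have hinb_a : pvInb (home.length : Int) a.1 a.2 = true := pvConn_inb ih hc
      have hok' := (Bool.and_eq_true _ _).mp hok
      have hinb_e : pvInb (home.length : Int) e.1 e.2 = true := hok'.1
      have hhome_e : pvHomeGet home e.1 e.2 = some t := by
        have h2 := hok'.2
        rwa [beq_iff_eq] at h2
      have hhome_a : pvHomeGet home a.1 a.2 = some t := by
        rw [pvConn_type ih, ht]
      exact Relation.ReflTransGen.tail ih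
        ⟨hinb_a, hinb_e, hnb, by rw [hhome_e, hhome_a]⟩
  · intro h
    induction h with
    | refl => exact .base c (List.mem_singleton.mpr rfl)
    | @tail b e' hcb hadj ih =>
      by_cases hec : e' = c
      · subst hec
        exact .base e' (List.mem_singleton.mpr rfl)
      · have hokE : pvOk home (home.length : Int) t e' = true := by
          unfold pvOk
          rw [hadj.2.1, hadj.2.2.2, pvConn_type hcb, ht]
          simp
        have hVE : pvMemV (home.length : Int) (pvVisitSet v c.1 c.2) e' = false := by
          cases hve : pvMemV (home.length : Int) (pvVisitSet v c.1 c.2) e' with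
          | false => rfl
          | true =>
            rcases (pvMemV_set hv hc e').1 hve with h1 | h1
            · rw [hdisj e' (Relation.ReflTransGen.tail hcb hadj)] at h1
              exact absurd h1 (by simp)
            · exact absurd (by rw [h1]) hec
        exact .step b e' ih hadj.2.2.1 hokE hVE

-- === A-side outer-loop invariant ===

def pvInvA (home : List (List Int)) (n k : Int) (pre : List (Int × Int))
    (s : List (List Bool) × PySem.Dict Int Int) : Prop :=
  pvValid n s.1 ∧
  (∀ d, pvMemV n s.1 d = true ↔ ∃ c ∈ pre, pvConn home n c d) ∧
  s.2 = pvRefFold home n k (pvRepsL home n pre)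

lemma pvCellA_step {home : List (List Int)} {k : Int} {pre suf : List (Int × Int)}
    {c : Int × Int} {s : List (List Bool) × PySem.Dict Int Int}
    (hPre : Pre_solution home 0)
    (hsplit : pvCells (home.length : Int) = pre ++ c :: suf)
    (hinv : pvInvA home (home.length : Int) k pre s) :
    pvInvA home (home.length : Int) k (pre ++ [c]) (pvCellA home (home.length : Int) k s c) := by
  obtain ⟨hval, hmem, hdict⟩ := hinv
  have hcmem : c ∈ pvCells (home.length : Int) := by rw [hsplit]; simp
  have hcinb : pvInb (home.length : Int) c.1 c.2 = true := mem_pvCells.1 hcmem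
  simp only [pvCellA]
  by_cases hvis : pvVisitGet s.1 c.1 c.2 = true
  · rw [if_pos hvis]
    have hcv : pvMemV (home.length : Int) s.1 c = true := by
      simp [pvMemV, hcinb, hvis]
    obtain ⟨c', hc'pre, hc'conn⟩ := (hmem c).1 hcv
    refine ⟨hval, ?_, ?_⟩
    · intro d
      rw [hmem d]
      constructor
      · rintro ⟨x, hx, hconn⟩
        exact ⟨x, by simp [hx], hconn⟩
      · rintro ⟨x, hx, hconn⟩
        rw [List.mem_append, List.mem_singleton] at hx
        rcases hx with hx | rfl
        · exact ⟨x, hx, hconn⟩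
        · exact ⟨c', hc'pre, pvConn_trans hc'conn hconn⟩
    · rw [hdict]
      congr 1
      unfold pvRepsL
      rw [List.filter_append]
      have hdecf : @decide (pvIsRep home (home.length : Int) c) (Classical.propDecidable _)
          = false := by
        rw [decide_eq_false_iff_not]
        intro hrep
        have hc'inb : pvInb (home.length : Int) c'.1 c'.2 = true := by
          apply mem_pvCells.1
          rw [hsplit]
          exact List.mem_append_left _ hc'pre
        have hlt : pvIdxI (home.length : Int) c' < pvIdxI (home.length : Int) c :=
          (pvCells_prefix hsplit hc'inb).1 hc'pre
        have hle := hrep.2 c' (pvConn_symm hc'conn)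
        omega
      simp [hdecf]
  · rw [if_neg hvis]
    have hvisf : pvVisitGet s.1 c.1 c.2 = false := by simpa using hvis
    have hdisj : ∀ d, pvConn home (home.length : Int) c d →
        pvMemV (home.length : Int) s.1 d = false := by
      intro d hconn
      cases hmemd : pvMemV (home.length : Int) s.1 d with
      | false => rfl
      | true =>
        obtain ⟨x, hx, hxd⟩ := (hmem d).1 hmemd
        have hcv : pvMemV (home.length : Int) s.1 c = true :=
          (hmem c).2 ⟨x, hx, pvConn_trans hxd (pvConn_symm hconn)⟩
        simp [pvMemV, hcinb, hvisf] at hcv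
    have hrep : pvIsRep home (home.length : Int) c := by
      refine ⟨hcinb, ?_⟩
      intro d hconn
      by_contra hlt
      rw [not_le] at hlt
      have hdinb := pvConn_inb hconn hcinb
      have hdpre : d ∈ pre := (pvCells_prefix hsplit hdinb).2 (by omega)
      have hmd : pvMemV (home.length : Int) s.1 d = true :=
        (hmem d).2 ⟨d, hdpre, Relation.ReflTransGen.refl⟩
      rw [hdisj d hconn] at hmd
      exact absurd hmd (by simp)
    obtain ⟨t0, ht0⟩ := pvHomeGet_some hPre hcinb
    have htt : (pvHomeGet home c.1 c.2).getD 0 = t0 := by rw [ht0]; rfl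
    have hv1 : pvValid (home.length : Int) (pvVisitSet s.1 c.1 c.2) := pvValid_set hval hcinb
    have hbase : ∀ x ∈ [c], pvMemV (home.length : Int) (pvVisitSet s.1 c.1 c.2) x = true := by
      intro x hx
      rw [List.mem_singleton] at hx
      subst hx
      rw [pvMemV_set hval hcinb]
      exact Or.inr rfl
    have hfuel : ((home.length : Int).toNat * (home.length : Int).toNat
          - pvCardP (home.length : Int) (pvMemV (home.length : Int) (pvVisitSet s.1 c.1 c.2)))
        + ([c] : List (Int × Int)).length
        ≤ (home.length : Int).toNat * (home.length : Int).toNat + 1 := by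
      have := pvCardP_le (n := (home.length : Int))
        (P := pvMemV (home.length : Int) (pvVisitSet s.1 c.1 c.2))
      simp only [List.length_singleton]
      omega
    obtain ⟨hrv, hrmem, hrsize⟩ := pvGroupLoop_spec (home := home) (n := (home.length : Int))
      (t := (pvHomeGet home c.1 c.2).getD 0)
      ((home.length : Int).toNat * (home.length : Int).toNat + 1)
      (pvVisitSet s.1 c.1 c.2) [c] 0 hv1 hbase hfuel
    have hreach := pvReach_iff_conn hPre hcinb ht0 hval hdisj
    rw [← htt] at hreach
    set rr := pvGroupLoop home (home.length : Int) ((pvHomeGet home c.1 c.2).getD 0)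
      ((home.length : Int).toNat * (home.length : Int).toNat + 1)
      (pvVisitSet s.1 c.1 c.2) [c] 0 with hrr
    have hmem2 : ∀ d, pvMemV (home.length : Int) rr.1 d = true ↔
        pvMemV (home.length : Int) s.1 d = true ∨ pvConn home (home.length : Int) c d := by
      intro d
      rw [hrmem d, hreach d, pvMemV_set hval hcinb d]
      constructor
      · rintro ((h1 | h1) | h1)
        · exact Or.inl h1
        · exact Or.inr (by rw [h1]; exact Relation.ReflTransGen.refl)
        · exact Or.inr h1
      · rintro (h1 | h1)
        · exact Or.inl (Or.inl h1)
        · exact Or.inr h1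
    have hcs : pvCardP (home.length : Int)
          (pvMemV (home.length : Int) (pvVisitSet s.1 c.1 c.2))
        = pvCardP (home.length : Int) (pvMemV (home.length : Int) s.1)
          + ({c} : Finset (Int × Int)).card := by
      apply pvCardP_union_finset
      · intro d
        rw [pvMemV_set hval hcinb d]
        simp
      · intro d hd
        rw [Finset.mem_singleton] at hd
        subst hd
        exact mem_pvGrid.2 hcinb
      · intro d hd
        rw [Finset.mem_singleton] at hd
        subst hd
        simp [pvMemV, hcinb, hvisf]
    have hca : pvCardP (home.length : Int) (pvMemV (home.length : Int) rr.1)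
        = pvCardP (home.length : Int) (pvMemV (home.length : Int) s.1)
          + (pvCompF home (home.length : Int) c).card := by
      apply pvCardP_union_finset
      · intro d
        rw [hmem2 d, mem_pvCompF]
        constructor
        · rintro (h1 | h1)
          · exact Or.inl h1
          · exact Or.inr ⟨mem_pvGrid.2 (pvConn_inb h1 hcinb), h1⟩
        · rintro (h1 | ⟨_, h1⟩)
          · exact Or.inl h1
          · exact Or.inr h1
      · intro d hd
        exact (mem_pvCompF.1 hd).1
      · intro d hd
        exact hdisj d (mem_pvCompF.1 hd).2
    have hsize : rr.2 = ((pvCompF home (home.length : Int) c).card : Int) := by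
      rw [hrsize, hca, hcs]
      simp only [List.length_singleton, Finset.card_singleton]
      push_cast
      ring
    refine ⟨?_, ?_, ?_⟩
    · split_ifs with hk
      · exact hrv
      · exact hrv
    · intro d
      have hiff : pvMemV (home.length : Int)
            (if rr.2 ≥ k then (rr.1, s.2.insert ((pvHomeGet home c.1 c.2).getD 0)
                (s.2.getD ((pvHomeGet home c.1 c.2).getD 0) 0 + 1)) else (rr.1, s.2)).1 d
          = pvMemV (home.length : Int) rr.1 d := by
        split_ifs with hk
        · rfl
        · rfl
      rw [hiff, hmem2 d, hmem d]
      constructor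
      · rintro (⟨x, hx, hconn⟩ | h1)
        · exact ⟨x, by simp [hx], hconn⟩
        · exact ⟨c, by simp, h1⟩
      · rintro ⟨x, hx, hconn⟩
        rw [List.mem_append, List.mem_singleton] at hx
        rcases hx with hx | rfl
        · exact Or.inl ⟨x, hx, hconn⟩
        · exact Or.inr hconn
    · have hdect : @decide (pvIsRep home (home.length : Int) c) (Classical.propDecidable _)
          = true := @decide_eq_true _ (Classical.propDecidable _) hrep
      have hreps : pvRepsL home (home.length : Int) (pre ++ [c])
          = pvRepsL home (home.length : Int) pre ++ [c] := by
        unfold pvRepsL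
        rw [List.filter_append]
        simp [hdect]
      rw [hreps]
      unfold pvRefFold
      rw [List.foldl_append]
      simp only [List.foldl_cons, List.foldl_nil]
      rw [← pvRefFold, ← hdict, ← hsize]
      unfold pvTypeOf
      split_ifs with hk
      · rfl
      · rfl

lemma pvFoldA {home : List (List Int)} {k : Int} :
    ∀ (suf pre : List (Int × Int)) (s : List (List Bool) × PySem.Dict Int Int),
      Pre_solution home 0 →
      pvCells (home.length : Int) = pre ++ suf →
      pvInvA home (home.length : Int) k pre s →
      pvInvA home (home.length : Int) k (pre ++ suf)
        (suf.foldl (pvCellA home (home.length : Int) k) s) := by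
  intro suf
  induction suf with
  | nil => intro pre s _ _ h; simpa using h
  | cons c rest ih =>
    intro pre s hPre hsplit hinv
    have h1 := pvCellA_step (k := k) hPre hsplit hinv
    have h2 := ih (pre ++ [c]) _ hPre (by rw [List.append_assoc]; simpa using hsplit) h1
    simpa [List.append_assoc] using h2

-- === B-side: labels as a function on cells ===

def pvLab (n : Int) (l : List Int) (c : Int × Int) : Int := pvLget l (pvIdxI n c)

lemma pvRound_eq_map {home : List (List Int)} {n : Int} (l : List Int) :
    pvRound home n l = (pvCells n).map (fun c => pvNewLabel home n l c.1 c.2) := by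
  unfold pvRound
  have h2 : ((PySem.List.pyRange 0 n).foldl
      (fun acc i => (PySem.List.pyRange 0 n).foldl
        (fun acc2 j => acc2 ++ [pvNewLabel home n l i j]) acc) ([] : List Int))
      = (PySem.List.pyRange 0 n).foldl
        (fun acc i => acc ++ (PySem.List.pyRange 0 n).map (fun j => pvNewLabel home n l i j))
        ([] : List Int) := by
    apply PySem.List.foldl_congr_mem
    intro acc i _
    exact PySem.List.foldl_append_singleton_eq_map _ _ _
  rw [h2, PySem.List.foldl_append_eq_flatMap]
  unfold pvCells
  rw [List.map_flatMap]
  simp only [List.map_map, List.nil_append]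
  rfl

lemma pvLab_round {home : List (List Int)} {n : Int} {l : List Int} {c : Int × Int}
    (hc : pvInb n c.1 c.2 = true) :
    pvLab n (pvRound home n l) c = pvNewLabel home n l c.1 c.2 := by
  unfold pvLab pvLget
  rw [pvRound_eq_map]
  have h0 := (pvIdxI_toNat_lt hc).1
  rw [PySem.List.pyGet?_of_nonneg _ h0, List.getElem?_map, pvCells_idx hc]
  rfl

lemma pvLab_init {n : Int} {c : Int × Int} (hn : 0 ≤ n) (hc : pvInb n c.1 c.2 = true) :
    pvLab n (PySem.List.pyRange 0 (n * n) 1) c = pvIdxI n c := by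
  unfold pvLab pvLget
  obtain ⟨h0, hlt⟩ := pvIdxI_toNat_lt hc
  rw [PySem.List.pyGet?_of_nonneg _ h0, PySem.List.getElem?_pyRange_one]
  have h4 : ((n.toNat * n.toNat : Nat) : Int) = n * n := by
    push_cast [Int.toNat_of_nonneg hn]
    ring
  rw [if_pos (by omega)]
  have h5 : (0 : Int) + ((pvIdxI n c).toNat : Int) = pvIdxI n c := by omega
  simp only [Option.getD_some, h5]

lemma pvList_eq_map {n : Int} {l : List Int} (hn : 0 ≤ n)
    (hlen : l.length = n.toNat * n.toNat) : l = (pvCells n).map (pvLab n l) := by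
  apply List.ext_getElem?
  intro m
  rw [List.getElem?_map]
  by_cases hm : m < n.toNat * n.toNat
  · obtain ⟨c, hget, hinb, hidx⟩ := pvCells_pos m hm
    rw [hget]
    simp only [Option.map_some]
    have hl : m < l.length := by omega
    rw [List.getElem?_eq_getElem hl]
    unfold pvLab pvLget
    rw [hidx, PySem.List.pyGet?_natCast, List.getElem?_eq_getElem hl]
    rfl
  · have h1 : l.length ≤ m := by omega
    have h2 : (pvCells n).length ≤ m := by
      rw [pvCells_length hn]
      omega
    rw [List.getElem?_eq_none h1, List.getElem?_eq_none h2]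
    rfl

lemma pvRange_eq_map_cells {n : Int} (hn : 0 ≤ n) :
    PySem.List.pyRange 0 (n * n) 1 = (pvCells n).map (pvIdxI n) := by
  apply List.ext_getElem?
  intro m
  rw [PySem.List.getElem?_pyRange_one, List.getElem?_map]
  have h4 : ((n.toNat * n.toNat : Nat) : Int) = n * n := by
    push_cast [Int.toNat_of_nonneg hn]
    ring
  by_cases hm : m < n.toNat * n.toNat
  · rw [if_pos (by omega)]
    obtain ⟨c, hget, hinb, hidx⟩ := pvCells_pos m hm
    rw [hget]
    simp [hidx]
  · rw [if_neg (by omega)]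
    have h2 : (pvCells n).length ≤ m := by
      rw [pvCells_length hn]
      omega
    rw [List.getElem?_eq_none h2]
    rfl

-- === B-side: one candidate analysis of pvNewLabel ===

lemma pvIfMin_le (c : Prop) [Decidable c] (m x : Int) : (if c then min m x else m) ≤ m := by
  split_ifs
  · exact min_le_left _ _
  · exact le_rfl

lemma pvIfMin_le_x (c : Prop) [Decidable c] (m x : Int) (h : c) :
    (if c then min m x else m) ≤ x := by
  rw [if_pos h]
  exact min_le_right _ _

lemma pvMinStep {home : List (List Int)} {n : Int} {l : List Int} {c e : Int × Int}
    {m : Int} {b : Bool}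
    (H : ∃ d, (d = c ∨ pvAdj home n c d) ∧ m = pvLab n l d)
    (hb : b = true → pvAdj home n c e) :
    ∃ d, (d = c ∨ pvAdj home n c d) ∧
      (if b then min m (pvLab n l e) else m) = pvLab n l d := by
  cases hbv : b
  · simpa using H
  · simp only [if_true]
    rcases le_total m (pvLab n l e) with h | h
    · rw [min_eq_left h]
      exact H
    · rw [min_eq_right h]
      exact ⟨e, Or.inr (hb hbv), rfl⟩

lemma pvNewLabel_le_self {home : List (List Int)} {n : Int} {l : List Int} (i j : Int) :
    pvNewLabel home n l i j ≤ pvLab n l (i, j) := by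
  simp only [pvNewLabel]
  exact le_trans (pvIfMin_le _ _ _) (le_trans (pvIfMin_le _ _ _)
    (le_trans (pvIfMin_le _ _ _) (pvIfMin_le _ _ _)))

lemma pvNewLabel_witness {home : List (List Int)} {n : Int} {l : List Int} {c : Int × Int}
    (hc : pvInb n c.1 c.2 = true) :
    ∃ d, (d = c ∨ pvAdj home n c d) ∧ pvNewLabel home n l c.1 c.2 = pvLab n l d := by
  obtain ⟨i, j⟩ := c
  obtain ⟨h0, h1, h2, h3⟩ := pvInb_iff.1 hc
  dsimp only at h0 h1 h2 h3 ⊢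
  simp only [pvNewLabel]
  have e3 : pvLget l (i * n + j - 1) = pvLab n l (i, j - 1) := by
    have h9 : i * n + j - 1 = pvIdxI n (i, j - 1) := by
      unfold pvIdxI
      ring
    rw [pvLget, h9]
    rfl
  have e4 : pvLget l (i * n + j + 1) = pvLab n l (i, j + 1) := by
    have h9 : i * n + j + 1 = pvIdxI n (i, j + 1) := by
      unfold pvIdxI
      ring
    rw [pvLget, h9]
    rfl
  have e1 : pvLget l ((i - 1) * n + j) = pvLab n l (i - 1, j) := rfl
  have e2 : pvLget l ((i + 1) * n + j) = pvLab n l (i + 1, j) := rfl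
  have e0 : pvLget l (i * n + j) = pvLab n l (i, j) := rfl
  rw [e0, e1, e2, e3, e4]
  have hadj : ∀ (e : Int × Int), pvInb n e.1 e.2 = true → e ∈ pvNbrs (i, j) →
      (pvHomeGet home e.1 e.2 == pvHomeGet home i j) = true → pvAdj home n (i, j) e := by
    intro e hie hne hbe
    exact ⟨hc, hie, hne, by rwa [beq_iff_eq] at hbe⟩
  apply pvMinStep (e := (i, j + 1))
  apply pvMinStep (e := (i, j - 1))
  apply pvMinStep (e := (i + 1, j))
  apply pvMinStep (e := (i - 1, j))
  · exact ⟨(i, j), Or.inl rfl, rfl⟩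
  · intro hb
    rw [Bool.and_eq_true, decide_eq_true_eq] at hb
    exact hadj _ (pvInb_iff.2 (by dsimp only; omega)) (by simp [pvNbrs]) hb.2
  · intro hb
    rw [Bool.and_eq_true, decide_eq_true_eq] at hb
    exact hadj _ (pvInb_iff.2 (by dsimp only; omega)) (by simp [pvNbrs]) hb.2
  · intro hb
    rw [Bool.and_eq_true, decide_eq_true_eq] at hb
    exact hadj _ (pvInb_iff.2 (by dsimp only; omega)) (by simp [pvNbrs]) hb.2
  · intro hb
    rw [Bool.and_eq_true, decide_eq_true_eq] at hb
    exact hadj _ (pvInb_iff.2 (by dsimp only; omega)) (by simp [pvNbrs]) hb.2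

lemma pvNewLabel_le_adj {home : List (List Int)} {n : Int} {l : List Int} {c d : Int × Int}
    (h : pvAdj home n c d) : pvNewLabel home n l c.1 c.2 ≤ pvLab n l d := by
  obtain ⟨hcinb, hdinb, hmem, hhome⟩ := h
  obtain ⟨i, j⟩ := c
  obtain ⟨h0, h1, h2, h3⟩ := pvInb_iff.1 hcinb
  obtain ⟨g0, g1, g2, g3⟩ := pvInb_iff.1 hdinb
  dsimp only at h0 h1 h2 h3 ⊢
  have hbe : (pvHomeGet home d.1 d.2 == pvHomeGet home i j) = true := by
    rw [beq_iff_eq]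
    exact hhome
  simp only [pvNbrs, List.mem_cons, List.not_mem_nil, or_false] at hmem
  simp only [pvNewLabel]
  have e3 : pvLget l (i * n + j - 1) = pvLab n l (i, j - 1) := by
    have h9 : i * n + j - 1 = pvIdxI n (i, j - 1) := by
      unfold pvIdxI
      ring
    rw [pvLget, h9]
    rfl
  have e4 : pvLget l (i * n + j + 1) = pvLab n l (i, j + 1) := by
    have h9 : i * n + j + 1 = pvIdxI n (i, j + 1) := by
      unfold pvIdxI
      ring
    rw [pvLget, h9]
    rfl
  have e1 : pvLget l ((i - 1) * n + j) = pvLab n l (i - 1, j) := rfl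
  have e2 : pvLget l ((i + 1) * n + j) = pvLab n l (i + 1, j) := rfl
  have e0 : pvLget l (i * n + j) = pvLab n l (i, j) := rfl
  rw [e0, e1, e2, e3, e4]
  rcases hmem with rfl | rfl | rfl | rfl
  · dsimp only at g0 g1 g2 g3 hbe ⊢
    refine le_trans (pvIfMin_le _ _ _) (le_trans (pvIfMin_le _ _ _)
      (le_trans (pvIfMin_le _ _ _) (pvIfMin_le_x _ _ _ ?_)))
    rw [Bool.and_eq_true, decide_eq_true_eq]
    exact ⟨by omega, hbe⟩
  · dsimp only at g0 g1 g2 g3 hbe ⊢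
    refine le_trans (pvIfMin_le _ _ _) (le_trans (pvIfMin_le _ _ _)
      (pvIfMin_le_x _ _ _ ?_))
    rw [Bool.and_eq_true, decide_eq_true_eq]
    exact ⟨by omega, hbe⟩
  · dsimp only at g0 g1 g2 g3 hbe ⊢
    refine le_trans (pvIfMin_le _ _ _) (pvIfMin_le_x _ _ _ ?_)
    rw [Bool.and_eq_true, decide_eq_true_eq]
    exact ⟨by omega, hbe⟩
  · dsimp only at g0 g1 g2 g3 hbe ⊢
    refine pvIfMin_le_x _ _ _ ?_
    rw [Bool.and_eq_true, decide_eq_true_eq]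
    exact ⟨by omega, hbe⟩

-- === B-side: Good invariant, termination, fixpoint value ===

def pvGoodL (home : List (List Int)) (n : Int) (l : List Int) : Prop :=
  l.length = n.toNat * n.toNat ∧
  ∀ c, pvInb n c.1 c.2 = true →
    (∃ e, pvConn home n c e ∧ pvLab n l c = pvIdxI n e) ∧ pvLab n l c ≤ pvIdxI n c

lemma pvGood_round {home : List (List Int)} {n : Int} {l : List Int} (hn : 0 ≤ n)
    (hG : pvGoodL home n l) : pvGoodL home n (pvRound home n l) := by
  obtain ⟨hlen, hinv⟩ := hG
  constructor
  · rw [pvRound_eq_map, List.length_map, pvCells_length hn]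
  · intro c hcinb
    rw [pvLab_round hcinb]
    constructor
    · obtain ⟨d, hd, hval⟩ := pvNewLabel_witness (l := l) hcinb
      have hdinb : pvInb n d.1 d.2 = true := by
        rcases hd with rfl | hadj
        · exact hcinb
        · exact hadj.2.1
      obtain ⟨⟨e, hce, hlab⟩, _⟩ := hinv d hdinb
      refine ⟨e, ?_, by rw [hval, hlab]⟩
      rcases hd with rfl | hadj
      · exact hce
      · exact pvConn_trans (Relation.ReflTransGen.single hadj) hce
    · exact le_trans (pvNewLabel_le_self c.1 c.2) (hinv c hcinb).2

noncomputable def pvSumL (n : Int) (l : List Int) : Nat :=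
  ∑ c ∈ pvGrid n, (pvLab n l c).toNat

lemma pvSum_round_lt {home : List (List Int)} {n : Int} {l : List Int} (hn : 0 ≤ n)
    (hG : pvGoodL home n l) (hne : pvRound home n l ≠ l) :
    pvSumL n (pvRound home n l) < pvSumL n l := by
  have hGr := pvGood_round hn hG
  obtain ⟨hlen, hinv⟩ := hG
  unfold pvSumL
  apply Finset.sum_lt_sum
  · intro c hcg
    have hcinb := mem_pvGrid.1 hcg
    have h1 : pvLab n (pvRound home n l) c ≤ pvLab n l c := by
      rw [pvLab_round hcinb]
      exact pvNewLabel_le_self c.1 c.2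
    exact Int.toNat_le_toNat h1
  · have hnall : ¬ ∀ c ∈ pvCells n, pvNewLabel home n l c.1 c.2 = pvLab n l c := by
      intro hall
      apply hne
      rw [pvRound_eq_map]
      conv_rhs => rw [pvList_eq_map hn hlen]
      exact List.map_congr_left hall
    simp only [not_forall] at hnall
    obtain ⟨c, hcm, hne2⟩ := hnall
    have hcinb := mem_pvCells.1 hcm
    refine ⟨c, mem_pvGrid.2 hcinb, ?_⟩
    have hlt : pvNewLabel home n l c.1 c.2 < pvLab n l c :=
      lt_of_le_of_ne (pvNewLabel_le_self c.1 c.2) hne2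
    obtain ⟨⟨e, hce, hlab⟩, _⟩ := hGr.2 c hcinb
    have hnew0 : 0 ≤ pvLab n (pvRound home n l) c := by
      rw [hlab]
      exact (pvIdxI_toNat_lt (pvConn_inb hce hcinb)).1
    rw [pvLab_round hcinb] at hnew0
    have hfin : (pvLab n (pvRound home n l) c) = pvNewLabel home n l c.1 c.2 :=
      pvLab_round hcinb
    rw [hfin]
    omega

lemma pvIter_fix {home : List (List Int)} {n : Int} (hn : 0 ≤ n) :
    ∀ (F : Nat) (l : List Int), pvGoodL home n l → pvSumL n l < F →
      pvGoodL home n (pvIter home n F l) ∧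
      pvRound home n (pvIter home n F l) = pvIter home n F l := by
  intro F
  induction F with
  | zero =>
    intro l hG hS
    exact absurd hS (Nat.not_lt_zero _)
  | succ F ih =>
    intro l hG hS
    by_cases hr : pvRound home n l = l
    · have hred : pvIter home n (F + 1) l = pvRound home n l := by
        simp [pvIter, hr]
      rw [hred, hr]
      exact ⟨hG, hr⟩
    · have hred : pvIter home n (F + 1) l = pvIter home n F (pvRound home n l) := by
        simp [pvIter, hr]
      rw [hred]
      have hSr := pvSum_round_lt hn hG hr
      exact ih (pvRound home n l) (pvGood_round hn hG) (by omega)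

lemma pvFix_conn_eq {home : List (List Int)} {n : Int} {l : List Int}
    (hfix : pvRound home n l = l) {c d : Int × Int} (h : pvConn home n c d) :
    pvLab n l c = pvLab n l d := by
  induction h with
  | refl => rfl
  | @tail b d hcb hadj ih =>
    have hb1 := pvLab_round (home := home) (l := l) (c := b) hadj.1
    rw [hfix] at hb1
    have hb2 := pvLab_round (home := home) (l := l) (c := d) (pvAdj_symm hadj).1
    rw [hfix] at hb2
    have h1 : pvLab n l b ≤ pvLab n l d := by
      rw [hb1]
      exact pvNewLabel_le_adj hadj
    have h2 : pvLab n l d ≤ pvLab n l b := by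
      rw [hb2]
      exact pvNewLabel_le_adj (pvAdj_symm hadj)
    rw [ih]
    omega

lemma pvRep_unique {home : List (List Int)} {n : Int} {r r' : Int × Int}
    (h1 : pvIsRep home n r) (h2 : pvIsRep home n r') (h : pvConn home n r r') : r = r' := by
  have ha := h1.2 r' h
  have hb := h2.2 r (pvConn_symm h)
  exact pvIdx_inj h1.1 h2.1 (by omega)

lemma pvFix_val {home : List (List Int)} {n : Int} {l : List Int}
    (hfix : pvRound home n l = l) (hG : pvGoodL home n l)
    {c : Int × Int} (hc : pvInb n c.1 c.2 = true) :
    ∃ r, pvIsRep home n r ∧ pvConn home n c r ∧ pvLab n l c = pvIdxI n r := by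
  have hcg : c ∈ pvCompF home n c := mem_pvCompF.2 ⟨mem_pvGrid.2 hc, Relation.ReflTransGen.refl⟩
  obtain ⟨r, hrmem, hrmin⟩ := Finset.exists_min_image (pvCompF home n c) (pvIdxI n) ⟨c, hcg⟩
  obtain ⟨hrg, hrconn⟩ := mem_pvCompF.1 hrmem
  have hrinb := mem_pvGrid.1 hrg
  have hrep : pvIsRep home n r := by
    refine ⟨hrinb, ?_⟩
    intro d hconn
    exact hrmin d (mem_pvCompF.2 ⟨mem_pvGrid.2 (pvConn_inb hconn hrinb),
      pvConn_trans hrconn hconn⟩)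
  refine ⟨r, hrep, hrconn, ?_⟩
  have heq : pvLab n l c = pvLab n l r := pvFix_conn_eq hfix hrconn
  obtain ⟨⟨e, hre, hlab⟩, hle⟩ := hG.2 r hrinb
  have hge : pvIdxI n r ≤ pvIdxI n e := hrmin e (mem_pvCompF.2
    ⟨mem_pvGrid.2 (pvConn_inb hre hrinb), pvConn_trans hrconn hre⟩)
  omega

-- === B-side: the size dict over the final labels ===

noncomputable def pvCntI (home : List (List Int)) (n : Int) (pre : List (Int × Int))
    (r : Int × Int) : Int :=
  ((@List.filter _ (fun x => @decide (pvConn home n r x) (Classical.propDecidable _)) pre).length : Int)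

def pvInvS (home : List (List Int)) (n : Int) (pre : List (Int × Int))
    (d : PySem.Dict Int Int) : Prop :=
  d.items = (pvRepsL home n pre).map (fun r => (pvIdxI n r, pvCntI home n pre r))

lemma pvSizeStep {home : List (List Int)} {n : Int} {l : List Int}
    (hfix : pvRound home n l = l) (hG : pvGoodL home n l)
    {pre suf : List (Int × Int)} {c : Int × Int} {d : PySem.Dict Int Int}
    (hsplit : pvCells n = pre ++ c :: suf) (hinv : pvInvS home n pre d) :
    pvInvS home n (pre ++ [c]) (d.insert (pvLab n l c) (d.getD (pvLab n l c) 0 + 1)) := by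
  have hcmem : c ∈ pvCells n := by rw [hsplit]; simp
  have hcinb := mem_pvCells.1 hcmem
  obtain ⟨rc, hrcrep, hrcconn, hrcval⟩ := pvFix_val hfix hG hcinb
  have hnd := pvCells_nodup (n := n)
  rw [hsplit] at hnd
  have hpre_nodup : pre.Nodup := (List.nodup_append.1 hnd).1
  have hcnotpre : c ∉ pre := fun hcp =>
    absurd ((pvCells_prefix hsplit hcinb).1 hcp) (lt_irrefl _)
  have hkeys : d.keys = (pvRepsL home n pre).map (fun r => pvIdxI n r) := by
    simp only [PySem.Dict.keys]
    rw [hinv, List.map_map]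
    rfl
  have hrepspre : ∀ r ∈ pvRepsL home n pre, r ∈ pre := fun r hr => List.mem_of_mem_filter hr
  have hrepsinb : ∀ r ∈ pvRepsL home n pre, pvInb n r.1 r.2 = true := fun r hr =>
    mem_pvCells.1 (by rw [hsplit]; exact List.mem_append_left _ (hrepspre r hr))
  have hrepsIsRep : ∀ r ∈ pvRepsL home n pre, pvIsRep home n r := by
    intro r hr
    unfold pvRepsL at hr
    have h1 := List.of_mem_filter hr
    exact @of_decide_eq_true _ (Classical.propDecidable _) h1
  have hreps_nodup : (pvRepsL home n pre).Nodup := List.Nodup.filter _ hpre_nodup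
  have hkeys_nodup : d.keys.Nodup := by
    rw [hkeys]
    exact List.Nodup.map_on
      (fun x hx y hy hxy => pvIdx_inj (hrepsinb x hx) (hrepsinb y hy) hxy) hreps_nodup
  by_cases hcrep : pvIsRep home n c
  · have hrc_eq : rc = c := pvRep_unique hrcrep hcrep (pvConn_symm hrcconn)
    have hlabc : pvLab n l c = pvIdxI n c := by rw [hrcval, hrc_eq]
    have hnotin : d.contains (pvLab n l c) = false := by
      rw [PySem.Dict.contains_eq_decide_mem_keys, decide_eq_false_iff_not, hkeys, hlabc]
      intro hmemk
      obtain ⟨r, hr, hreq⟩ := List.mem_map.1 hmemk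
      have hre : r = c := pvIdx_inj (hrepsinb r hr) hcinb hreq
      exact hcnotpre (hre ▸ hrepspre r hr)
    unfold pvInvS
    rw [PySem.Dict.items_insert_of_not_contains _ _ hnotin,
      PySem.Dict.getD_of_not_contains _ _ hnotin]
    have hrs : pvRepsL home n (pre ++ [c]) = pvRepsL home n pre ++ [c] := by
      unfold pvRepsL
      rw [List.filter_append]
      simp [@decide_eq_true _ (Classical.propDecidable _) hcrep]
    rw [hrs, List.map_append, hinv]
    congr 1
    · apply List.map_congr_left
      intro r hr
      have hnc : ¬ pvConn home n r c := by
        intro hconn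
        have hre : r = c := pvRep_unique (hrepsIsRep r hr) hcrep hconn
        exact hcnotpre (hre ▸ hrepspre r hr)
      unfold pvCntI
      rw [List.filter_append]
      have hf : (@List.filter _
          (fun x => @decide (pvConn home n r x) (Classical.propDecidable _)) [c]) = [] := by
        have hd := @decide_eq_false (pvConn home n r c) (Classical.propDecidable _) hnc
        simp [hd]
      rw [hf]
      simp
    · simp only [List.map_cons, List.map_nil]
      rw [hlabc]
      have hcnt : pvCntI home n (pre ++ [c]) c = 1 := by
        unfold pvCntI
        rw [List.filter_append]
        have hprefilter : (@List.filter _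
            (fun x => @decide (pvConn home n c x) (Classical.propDecidable _)) pre) = [] := by
          rw [List.filter_eq_nil_iff]
          intro x hx hdec
          have hconn := @of_decide_eq_true _ (Classical.propDecidable _) hdec
          have h1 : pvIdxI n c ≤ pvIdxI n x := hcrep.2 x hconn
          have h2 : pvIdxI n x < pvIdxI n c :=
            (pvCells_prefix hsplit (pvConn_inb hconn hcinb)).1 hx
          omega
        have hc1 : (@List.filter _
            (fun x => @decide (pvConn home n c x) (Classical.propDecidable _)) [c]) = [c] := by
          simp [@decide_eq_true (pvConn home n c c) (Classical.propDecidable _)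
            Relation.ReflTransGen.refl]
        rw [hprefilter, hc1]
        simp
      rw [hcnt]
      norm_num
  · have hrcne : rc ≠ c := fun he => hcrep (he ▸ hrcrep)
    have hrcinb := hrcrep.1
    have hrcidx_lt : pvIdxI n rc < pvIdxI n c :=
      lt_of_le_of_ne (hrcrep.2 c (pvConn_symm hrcconn))
        (fun he => hrcne (pvIdx_inj hrcinb hcinb he))
    have hrcpre : rc ∈ pre := (pvCells_prefix hsplit hrcinb).2 hrcidx_lt
    have hrcreps : rc ∈ pvRepsL home n pre :=
      List.mem_filter.2 ⟨hrcpre, @decide_eq_true _ (Classical.propDecidable _) hrcrep⟩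
    have hmementry : (pvIdxI n rc, pvCntI home n pre rc) ∈ d.items := by
      rw [hinv]
      exact List.mem_map.2 ⟨rc, hrcreps, rfl⟩
    have hgd : d.getD (pvLab n l c) 0 = pvCntI home n pre rc := by
      rw [hrcval]
      exact PySem.Dict.getD_of_mem_items _ hmementry hkeys_nodup 0
    have hcont : d.contains (pvLab n l c) = true := by
      rw [PySem.Dict.contains_eq_decide_mem_keys, decide_eq_true_eq, hrcval, hkeys]
      exact List.mem_map.2 ⟨rc, hrcreps, rfl⟩
    unfold pvInvS
    rw [PySem.Dict.items_insert_of_contains _ _ hcont, hinv, hgd]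
    have hrs : pvRepsL home n (pre ++ [c]) = pvRepsL home n pre := by
      unfold pvRepsL
      rw [List.filter_append]
      have hd := @decide_eq_false (pvIsRep home n c) (Classical.propDecidable _) hcrep
      simp [hd]
    rw [hrs, List.map_map]
    apply List.map_congr_left
    intro r hr
    dsimp only [Function.comp]
    by_cases hrrc : r = rc
    · subst hrrc
      rw [hrcval]
      rw [if_pos (beq_self_eq_true _)]
      have hconnrc : pvConn home n r c := pvConn_symm hrcconn
      have hcnt : pvCntI home n (pre ++ [c]) r = pvCntI home n pre r + 1 := by
        unfold pvCntI
        rw [List.filter_append]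
        have hc1 : (@List.filter _
            (fun x => @decide (pvConn home n r x) (Classical.propDecidable _)) [c]) = [c] := by
          simp [@decide_eq_true (pvConn home n r c) (Classical.propDecidable _) hconnrc]
        rw [hc1, List.length_append]
        simp only [List.length_singleton]
        push_cast
        ring
      rw [hcnt]
    · have hne : (pvIdxI n r == pvLab n l c) = false := by
        rw [hrcval, beq_eq_false_iff_ne]
        intro he
        exact hrrc (pvIdx_inj (hrepsinb r hr) hrcinb he)
      rw [if_neg (by rw [hne]; exact Bool.false_ne_true)]
      have hnc : ¬ pvConn home n r c := by
        intro hconn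
        exact hrrc (pvRep_unique (hrepsIsRep r hr) hrcrep (pvConn_trans hconn hrcconn))
      have hcnt : pvCntI home n (pre ++ [c]) r = pvCntI home n pre r := by
        unfold pvCntI
        rw [List.filter_append]
        have hf : (@List.filter _
            (fun x => @decide (pvConn home n r x) (Classical.propDecidable _)) [c]) = [] := by
          have hd := @decide_eq_false (pvConn home n r c) (Classical.propDecidable _) hnc
          simp [hd]
        rw [hf]
        simp
      rw [hcnt]

lemma pvFoldS {home : List (List Int)} {n : Int} {l : List Int}
    (hfix : pvRound home n l = l) (hG : pvGoodL home n l) :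
    ∀ (suf pre : List (Int × Int)) (d : PySem.Dict Int Int),
      pvCells n = pre ++ suf → pvInvS home n pre d →
      pvInvS home n (pre ++ suf)
        (suf.foldl (fun d c => d.insert (pvLab n l c) (d.getD (pvLab n l c) 0 + 1)) d) := by
  intro suf
  induction suf with
  | nil => intro pre d _ h; simpa using h
  | cons c rest ih =>
    intro pre d hsplit hinv
    have h1 := pvSizeStep hfix hG hsplit hinv
    have h2 := ih (pre ++ [c]) _ (by rw [List.append_assoc]; simpa using hsplit) h1
    simpa [List.append_assoc] using h2

-- === putting B together ===

lemma pvCnt_card {home : List (List Int)} {n : Int} (r : Int × Int) :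
    pvCntI home n (pvCells n) r = ((pvCompF home n r).card : Int) := by
  unfold pvCntI
  have h : ((@List.filter _ (fun x => @decide (pvConn home n r x) (Classical.propDecidable _))
      (pvCells n)).length) = (pvCompF home n r).card := by
    rw [← List.toFinset_card_of_nodup (List.Nodup.filter _ pvCells_nodup)]
    congr 1
    ext e
    simp only [List.mem_toFinset, List.mem_filter, mem_pvCompF, mem_pvCells, mem_pvGrid]
    constructor
    · rintro ⟨h1, h2⟩
      exact ⟨h1, @of_decide_eq_true _ (Classical.propDecidable _) h2⟩
    · rintro ⟨h1, h2⟩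
      exact ⟨h1, @decide_eq_true _ (Classical.propDecidable _) h2⟩
  rw [h]

lemma pvTypeLookup {home : List (List Int)} {n : Int} {r : Int × Int} (hn : 0 ≤ n)
    (hr : pvInb n r.1 r.2 = true) :
    (pvHomeGet home (PySem.Int.floordiv (pvIdxI n r) n) (PySem.Int.mod (pvIdxI n r) n)).getD 0
      = pvTypeOf home r := by
  obtain ⟨i, j⟩ := r
  obtain ⟨h0, h1, h2, h3⟩ := pvInb_iff.1 hr
  dsimp only at h0 h1 h2 h3 ⊢
  have hnpos : (0 : Int) < n := by omega
  unfold pvIdxI pvTypeOf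
  dsimp only
  have hdiv : PySem.Int.floordiv (i * n + j) n = i := by
    rw [PySem.Int.floordiv_eq_ediv_of_pos hnpos, add_comm,
      Int.add_mul_ediv_right _ _ (by omega : n ≠ 0),
      Int.ediv_eq_zero_of_lt h2 h3]
    omega
  have hmod : PySem.Int.mod (i * n + j) n = j := by
    rw [PySem.Int.mod_eq_emod_of_pos hnpos, add_comm, Int.add_mul_emod_self_right,
      Int.emod_eq_of_lt h2 h3]
  rw [hdiv, hmod]

lemma pvSelB_eq_selStep : pvSelB = pvSelStep := by
  funext s p
  simp only [pvSelB, pvSelStep, pvTupGt, Bool.or_eq_true, Bool.and_eq_true, decide_eq_true_eq]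

lemma pvB_eq_ref {home : List (List Int)} (k : Int) (hPre : Pre_solution home 0) :
    solution_alt home k
      = ((pvRefFold home (home.length : Int) k
            (pvRepsL home (home.length : Int) (pvCells (home.length : Int)))).items.foldl
          pvSelStep (0, 0)).2 := by
  have hn : (0 : Int) ≤ (home.length : Int) := Int.natCast_nonneg _
  have h4 : (((home.length : Int).toNat * (home.length : Int).toNat : Nat) : Int)
      = (home.length : Int) * (home.length : Int) := by
    push_cast [Int.toNat_of_nonneg hn]
    ring
  have hG0 : pvGoodL home (home.length : Int)
      (PySem.List.pyRange 0 ((home.length : Int) * (home.length : Int)) 1) := by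
    constructor
    · rw [PySem.List.length_pyRange_one]
      omega
    · intro c hcinb
      rw [pvLab_init hn hcinb]
      exact ⟨⟨c, Relation.ReflTransGen.refl, rfl⟩, le_rfl⟩
  have hS0 : pvSumL (home.length : Int)
        (PySem.List.pyRange 0 ((home.length : Int) * (home.length : Int)) 1)
      < (home.length : Int).toNat * (home.length : Int).toNat
          * ((home.length : Int).toNat * (home.length : Int).toNat) + 1 := by
    unfold pvSumL
    have hb : ∀ c ∈ pvGrid (home.length : Int),
        (pvLab (home.length : Int)
          (PySem.List.pyRange 0 ((home.length : Int) * (home.length : Int)) 1) c).toNat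
        ≤ (home.length : Int).toNat * (home.length : Int).toNat := by
      intro c hcg
      have hcinb := mem_pvGrid.1 hcg
      rw [pvLab_init hn hcinb]
      have := pvIdxI_toNat_lt hcinb
      omega
    have hsum := Finset.sum_le_card_nsmul (pvGrid (home.length : Int)) _
      ((home.length : Int).toNat * (home.length : Int).toNat) hb
    rw [pvGrid_card, smul_eq_mul] at hsum
    omega
  obtain ⟨hGf, hfix⟩ := pvIter_fix hn
    ((home.length : Int).toNat * (home.length : Int).toNat
      * ((home.length : Int).toNat * (home.length : Int).toNat) + 1)
    (PySem.List.pyRange 0 ((home.length : Int) * (home.length : Int)) 1) hG0 hS0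
  simp only [solution_alt]
  set L := pvIter home (home.length : Int)
    ((home.length : Int).toNat * (home.length : Int).toNat
      * ((home.length : Int).toNat * (home.length : Int).toNat) + 1)
    (PySem.List.pyRange 0 ((home.length : Int) * (home.length : Int)) 1) with hL
  have hfold_eq : (PySem.List.pyRange 0 ((home.length : Int) * (home.length : Int)) 1).foldl
      (fun (d : PySem.Dict Int Int) idx => d.insert (pvLget L idx) (d.getD (pvLget L idx) 0 + 1))
      PySem.Dict.empty
      = (pvCells (home.length : Int)).foldl
        (fun (d : PySem.Dict Int Int) c => d.insert (pvLab (home.length : Int) L c)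
          (d.getD (pvLab (home.length : Int) L c) 0 + 1)) PySem.Dict.empty := by
    rw [pvRange_eq_map_cells hn, List.foldl_map]
    rfl
  rw [hfold_eq]
  have hsz0 : pvInvS home (home.length : Int) [] PySem.Dict.empty := by
    unfold pvInvS pvRepsL
    rfl
  have hszfold := pvFoldS hfix hGf (pvCells (home.length : Int)) [] PySem.Dict.empty
    (by simp) hsz0
  simp only [List.nil_append] at hszfold
  unfold pvInvS at hszfold
  rw [hszfold, List.foldl_map]
  have hcong : ∀ (acc : PySem.Dict Int Int), ∀ r ∈ pvRepsL home (home.length : Int)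
      (pvCells (home.length : Int)),
      (if pvCntI home (home.length : Int) (pvCells (home.length : Int)) r ≥ k then
        acc.insert ((pvHomeGet home
            (PySem.Int.floordiv (pvIdxI (home.length : Int) r) (home.length : Int))
            (PySem.Int.mod (pvIdxI (home.length : Int) r) (home.length : Int))).getD 0)
          (acc.getD ((pvHomeGet home
            (PySem.Int.floordiv (pvIdxI (home.length : Int) r) (home.length : Int))
            (PySem.Int.mod (pvIdxI (home.length : Int) r) (home.length : Int))).getD 0) 0 + 1)
      else acc)
      = (if ((pvCompF home (home.length : Int) r).card : Int) ≥ k then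
          acc.insert (pvTypeOf home r) (acc.getD (pvTypeOf home r) 0 + 1) else acc) := by
    intro acc r hr
    have hrinb : pvInb (home.length : Int) r.1 r.2 = true :=
      mem_pvCells.1 (List.mem_of_mem_filter hr)
    rw [pvCnt_card, pvTypeLookup hn hrinb]
  rw [PySem.List.foldl_congr_mem _ _ _ _ hcong]
  rw [pvSelB_eq_selStep]
  rfl

lemma pvA_eq_ref {home : List (List Int)} (k : Int) (hPre : Pre_solution home 0) :
    solution home k
      = ((pvRefFold home (home.length : Int) k
            (pvRepsL home (home.length : Int) (pvCells (home.length : Int)))).items.foldl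
          pvSelStep (0, 0)).2 := by
  simp only [solution]
  have hcells : ((PySem.List.pyRange 0 (home.length : Int) 1).foldl
      (fun s i => (PySem.List.pyRange 0 (home.length : Int) 1).foldl
        (fun s' j => pvCellA home (home.length : Int) k s' (i, j)) s)
      (List.replicate (home.length : Int).toNat
        (List.replicate (home.length : Int).toNat false), PySem.Dict.empty))
      = (pvCells (home.length : Int)).foldl (pvCellA home (home.length : Int) k)
        (List.replicate (home.length : Int).toNat
          (List.replicate (home.length : Int).toNat false), PySem.Dict.empty) := by
    unfold pvCells
    rw [List.foldl_flatMap]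
    simp only [List.foldl_map]
  rw [hcells]
  have hinv0 : pvInvA home (home.length : Int) k []
      (List.replicate (home.length : Int).toNat
        (List.replicate (home.length : Int).toNat false), PySem.Dict.empty) := by
    refine ⟨⟨by simp, ?_⟩, ?_, rfl⟩
    · intro r hr
      rw [List.eq_of_mem_replicate hr]
      simp
    · intro e
      constructor
      · intro hmv
        exfalso
        obtain ⟨a, b⟩ := e
        by_cases hab : pvInb (home.length : Int) a b = true
        · obtain ⟨ha0, han, hb0, hbn⟩ := pvInb_iff.1 hab
          rw [pvMemV_of_get hab, pvVisitGet_natCast ha0 hb0] at hmv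
          have h1 : a.toNat < home.length := by omega
          have h2 : b.toNat < home.length := by omega
          simp [h1, h2] at hmv
        · unfold pvMemV at hmv
          rw [eq_false_of_ne_true hab] at hmv
          simp at hmv
      · rintro ⟨x, hx, _⟩
        simp at hx
  have hres := pvFoldA (pvCells (home.length : Int)) [] _ hPre (by simp) hinv0
  obtain ⟨_, _, hdict⟩ := hres
  simp only [List.nil_append] at hdict
  rw [hdict]

-- ===== VERDICT (by name: the statement is the Claim_ definition above) =====
theorem solution_spec : Claim_equal_solution := by
  intro home k _ hPre
  have hPre0 : Pre_solution home 0 := hPre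
  unfold Spec_solution
  rw [pvA_eq_ref k hPre0, pvB_eq_ref k hPre0]
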